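-- pv_equiv track=rewrite | github.com/elizajasin/documents_classification_ANN | FeatureExtraction.py | sumFEBigram
-- ===== SOURCE A (Python) =====
-- def sumFEBigram (data, atribut):
--     for i in range(len(data)):
--         for key in atribut:
--             atribut[key].append(0)
--         for j in range(len(data[i])):
--             if (j == 0) and (data[i][j]+'|<s>' in atribut.keys()) and (atribut[data[i][j]+'|<s>'][i] == 0):
--                 atribut[data[i][j]+'|<s>'][i] = 1
--                 # atribut[data[i][j] + '|<s>'][i] += 1
--             else:
--                 if (data[i][j]+'|'+data[i][j-1] in atribut.keys()) and (atribut[data[i][j]+'|'+data[i][j-1]][i] == 0):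
--                     atribut[data[i][j]+'|'+data[i][j-1]][i] = 1
--                     # atribut[data[i][j] + '|' + data[i][j - 1]][i] += 1
--                 if (j == len(data[i])) and ('</s>|' + data[i][j] in atribut.keys()) and (atribut['</s>|' + data[i][j]][i] == 0):
--                     atribut['</s>|' + data[i][j]][i] = 1
--                     # atribut['</s>|' + data[i][j]][i] += 1
--     return atribut
-- ===== SOURCE B (Python) =====
-- # B builds and returns a fresh dict (pre-padded rows, then one presence-set pass per
-- # document); A mutates `atribut` in place and returns it — the equivalence claimed is
-- # about the return value. B marks only a document's real bigrams plus its start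
-- # bigram, without A's accidental wraparound to the last token.
-- def sumFEBigram(data, atribut):
--     out = {key: row + [0] * len(data) for key, row in atribut.items()}
--     for i, toks in enumerate(data):
--         feats = {toks[j] + '|' + toks[j - 1] for j in range(1, len(toks))}
--         if toks:
--             feats.add(toks[0] + '|<s>')
--         for key, row in out.items():
--             if key in feats and row[i] == 0:
--                 row[i] = 1
--     return out
-- ===== Notes on version B (the rewrite author's own statement) =====
-- stated objective: alternative
-- what changed: A appends a zero per key and then walks each document's tokens mutating matching rows in place (with a j==0 if/else chain and a dead j==len branch); B pre-pads every row with len(data) zeros once and, per document, builds the set of feature keys the document contributes (its bigrams plus its start bigram) followed by a single marking pass over the keys.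
-- intended difference: On inputs where some document's first token has no start-bigram key usable (t0+'|<s>' missing from atribut, or its slot already nonzero) but the accidental wraparound key t0+'|'+t[-1] is present with a zero slot and is not one of the document's real bigrams, A marks that wraparound key with 1 (a negative-index j-1 slip at j==0), while B leaves it 0; B's value is intended because t[-1]..t[0] is not a bigram of the document. — e.g. on sumFEBigram([["a"]], [("a|a", [])]): A returns [("a|a", [1])], B returns [("a|a", [0])]
import Mathlib
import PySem

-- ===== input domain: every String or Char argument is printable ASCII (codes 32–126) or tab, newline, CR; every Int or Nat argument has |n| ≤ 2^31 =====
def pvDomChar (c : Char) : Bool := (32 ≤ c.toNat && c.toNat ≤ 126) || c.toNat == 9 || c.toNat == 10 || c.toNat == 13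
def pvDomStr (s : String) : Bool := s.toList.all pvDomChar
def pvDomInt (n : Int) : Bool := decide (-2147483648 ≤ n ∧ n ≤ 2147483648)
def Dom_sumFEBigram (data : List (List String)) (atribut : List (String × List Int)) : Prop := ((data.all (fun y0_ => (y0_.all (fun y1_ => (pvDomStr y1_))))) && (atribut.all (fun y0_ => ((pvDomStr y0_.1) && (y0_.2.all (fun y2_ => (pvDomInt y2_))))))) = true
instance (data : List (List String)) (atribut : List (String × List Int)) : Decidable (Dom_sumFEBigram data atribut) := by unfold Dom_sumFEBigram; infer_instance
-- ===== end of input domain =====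

set_option maxHeartbeats 1000000

-- B pre-pads every row once and, per document, builds the set of feature keys the
-- document contributes (its bigrams plus its start bigram) followed by one marking
-- pass over the keys; A mutates `atribut` in place and returns it, B returns a fresh
-- dict (the equivalence claimed here is about the return value).

-- ===== PORT A =====
def sumFEBigram (data : List (List String)) (atribut : List (String × List Int)) : List (String × List Int) :=
  -- the dict parameter, in insertion order
  let d0 : PySem.Dict String (List Int) := PySem.Dict.ofList atribut
  -- for i in range(len(data)):
  let dfin := (PySem.List.pyRange 0 (data.length : Int) 1).foldl (fun d i =>
    -- for key in atribut: atribut[key].append(0)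
    let d := d.keys.foldl (fun d k => d.modify k [] (fun v => v ++ [(0:Int)])) d
    -- for j in range(len(data[i])):
    (PySem.List.pyRange 0 ((PySem.List.pyGetD data i []).length : Int) 1).foldl (fun d j =>
      if j = 0 ∧ d.contains (PySem.List.pyGetD (PySem.List.pyGetD data i []) j "" ++ "|<s>") = true ∧
          PySem.List.pyGetD (d.getD (PySem.List.pyGetD (PySem.List.pyGetD data i []) j "" ++ "|<s>") []) i 0 = 0 then
        d.modify (PySem.List.pyGetD (PySem.List.pyGetD data i []) j "" ++ "|<s>") [] (fun v => PySem.List.pySetD v i 1)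
      else
        let d := if d.contains (PySem.List.pyGetD (PySem.List.pyGetD data i []) j "" ++ "|" ++ PySem.List.pyGetD (PySem.List.pyGetD data i []) (j - 1) "") = true ∧
            PySem.List.pyGetD (d.getD (PySem.List.pyGetD (PySem.List.pyGetD data i []) j "" ++ "|" ++ PySem.List.pyGetD (PySem.List.pyGetD data i []) (j - 1) "") []) i 0 = 0 then
            d.modify (PySem.List.pyGetD (PySem.List.pyGetD data i []) j "" ++ "|" ++ PySem.List.pyGetD (PySem.List.pyGetD data i []) (j - 1) "") [] (fun v => PySem.List.pySetD v i 1)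
          else d
        -- dead branch in the original: j == len(data[i]) never holds inside range(len(data[i]))
        if j = ((PySem.List.pyGetD data i []).length : Int) ∧ d.contains ("</s>|" ++ PySem.List.pyGetD (PySem.List.pyGetD data i []) j "") = true ∧
            PySem.List.pyGetD (d.getD ("</s>|" ++ PySem.List.pyGetD (PySem.List.pyGetD data i []) j "") []) i 0 = 0 then
          d.modify ("</s>|" ++ PySem.List.pyGetD (PySem.List.pyGetD data i []) j "") [] (fun v => PySem.List.pySetD v i 1)
        else d) d) d0
  dfin.items

-- ===== PORT B =====
def sumFEBigram_alt (data : List (List String)) (atribut : List (String × List Int)) : List (String × List Int) :=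
  let d0 : PySem.Dict String (List Int) := PySem.Dict.ofList atribut
  -- out = {key: row + [0] * len(data) for key, row in atribut.items()}
  let out0 := d0.items.foldl
    (fun o p => o.insert p.1 (p.2 ++ PySem.List.pyRepeat [(0:Int)] (data.length : Int)))
    PySem.Dict.empty
  -- for i, toks in enumerate(data):
  let fin := (PySem.List.enumerate data 0).foldl (fun out p =>
    -- feats = {toks[j] + '|' + toks[j-1] for j in range(1, len(toks))}
    let feats0 : PySem.Set String := PySem.Set.ofList ((PySem.List.pyRange 1 (p.2.length : Int) 1).map
      (fun j => PySem.List.pyGetD p.2 j "" ++ "|" ++ PySem.List.pyGetD p.2 (j - 1) ""))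
    -- if toks: feats.add(toks[0] + '|<s>')
    let feats := if p.2 = [] then feats0 else PySem.Set.add feats0 (PySem.List.pyGetD p.2 0 "" ++ "|<s>")
    -- for key, row in out.items(): if key in feats and row[i] == 0: row[i] = 1
    out.keys.foldl (fun o k =>
      if PySem.Set.contains feats k = true ∧ PySem.List.pyGetD (o.getD k []) p.1 0 = 0 then
        o.modify k [] (fun v => PySem.List.pySetD v p.1 1)
      else o) out) out0
  fin.items

-- ===== PRECONDITION & SPEC =====

-- key k is present and its slot for document i still holds 0
def pvOpen (d0 : PySem.Dict String (List Int)) (i : Int) (k : String) : Bool :=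
  d0.contains k && decide ((d0.getD k []).getD i.toNat 0 = 0)

-- document i triggers A's wraparound mark: its start-bigram key is unusable, but the
-- accidental key t0+'|'+t[-1] is present with a zero slot and is not a real bigram of t
def pvFire (d0 : PySem.Dict String (List Int)) (i : Int) (t : List String) : Bool :=
  !t.isEmpty && pvOpen d0 i (t.headI ++ "|" ++ t.getLastD "") &&
  !pvOpen d0 i (t.headI ++ "|<s>") &&
  decide ((t.headI ++ "|" ++ t.getLastD "") ∉ t.tail.zipWith (· ++ "|" ++ ·) t)

-- On inputs where some document's first token has no usable start-bigram key but the
-- accidental wraparound key t0+'|'+t[-1] (a negative-index j-1 slip at j==0) is present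
-- with a zero slot and is not one of the document's real bigrams, A marks that key with 1
-- while B leaves it 0; B's value is intended because t[-1]..t[0] is not a bigram of t.
def D_sumFEBigram (data : List (List String)) (atribut : List (String × List Int)) : Prop :=
  ((PySem.List.enumerate data 0).any (fun p => pvFire (PySem.Dict.ofList atribut) p.1 p.2)) = true
instance (data : List (List String)) (atribut : List (String × List Int)) : Decidable (D_sumFEBigram data atribut) := by unfold D_sumFEBigram; infer_instance

def Spec_sumFEBigram (data : List (List String)) (atribut : List (String × List Int)) (out : List (String × List Int)) : Prop := ¬ D_sumFEBigram data atribut → out = sumFEBigram_alt data atribut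
instance (data : List (List String)) (atribut : List (String × List Int)) (out : List (String × List Int)) : Decidable (Spec_sumFEBigram data atribut out) := by unfold Spec_sumFEBigram; infer_instance

def pvDiffWitness_sumFEBigram : List (List String) × (List (String × List Int)) := ([["a"]], [("a|a", [])])
def pvDiffWitnessOut_sumFEBigram : (List (String × List Int)) × (List (String × List Int)) := ([("a|a", [1])], [("a|a", [0])])

-- ===== CLAIM (what is proved, stated in full; the proofs are below) =====
def Claim_unchanged_sumFEBigram : Prop := ∀ (data : List (List String)) (atribut : List (String × List Int)), Dom_sumFEBigram data atribut → Spec_sumFEBigram data atribut (sumFEBigram data atribut)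
def Claim_changed_sumFEBigram : Prop := Dom_sumFEBigram (pvDiffWitness_sumFEBigram.1) (pvDiffWitness_sumFEBigram.2) ∧ D_sumFEBigram (pvDiffWitness_sumFEBigram.1) (pvDiffWitness_sumFEBigram.2) ∧ sumFEBigram (pvDiffWitness_sumFEBigram.1) (pvDiffWitness_sumFEBigram.2) = pvDiffWitnessOut_sumFEBigram.1 ∧ sumFEBigram_alt (pvDiffWitness_sumFEBigram.1) (pvDiffWitness_sumFEBigram.2) = pvDiffWitnessOut_sumFEBigram.2 ∧ pvDiffWitnessOut_sumFEBigram.1 ≠ pvDiffWitnessOut_sumFEBigram.2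

def Claim_exact_sumFEBigram : Prop := ∀ (data : List (List String)) (atribut : List (String × List Int)), Dom_sumFEBigram data atribut → D_sumFEBigram data atribut → sumFEBigram data atribut ≠ sumFEBigram_alt data atribut

-- ===== LEMMAS AND PROOFS =====

-- A's per-document loop body as a function of the index and the document
def pvAStep (d : PySem.Dict String (List Int)) (i : Int) (toks : List String) : PySem.Dict String (List Int) :=
  let d1 := d.keys.foldl (fun d k => d.modify k [] (fun v => v ++ [(0:Int)])) d
  (PySem.List.pyRange 0 (toks.length : Int) 1).foldl (fun d j =>
    if j = 0 ∧ d.contains (PySem.List.pyGetD toks j "" ++ "|<s>") = true ∧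
        PySem.List.pyGetD (d.getD (PySem.List.pyGetD toks j "" ++ "|<s>") []) i 0 = 0 then
      d.modify (PySem.List.pyGetD toks j "" ++ "|<s>") [] (fun v => PySem.List.pySetD v i 1)
    else
      let d' := if d.contains (PySem.List.pyGetD toks j "" ++ "|" ++ PySem.List.pyGetD toks (j - 1) "") = true ∧
          PySem.List.pyGetD (d.getD (PySem.List.pyGetD toks j "" ++ "|" ++ PySem.List.pyGetD toks (j - 1) "") []) i 0 = 0 then
          d.modify (PySem.List.pyGetD toks j "" ++ "|" ++ PySem.List.pyGetD toks (j - 1) "") [] (fun v => PySem.List.pySetD v i 1)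
        else d
      if j = (toks.length : Int) ∧ d'.contains ("</s>|" ++ PySem.List.pyGetD toks j "") = true ∧
          PySem.List.pyGetD (d'.getD ("</s>|" ++ PySem.List.pyGetD toks j "") []) i 0 = 0 then
        d'.modify ("</s>|" ++ PySem.List.pyGetD toks j "") [] (fun v => PySem.List.pySetD v i 1)
      else d') d1

-- B's per-document loop body
def pvBStep (out : PySem.Dict String (List Int)) (i : Int) (toks : List String) : PySem.Dict String (List Int) :=
  let feats0 : PySem.Set String := PySem.Set.ofList ((PySem.List.pyRange 1 (toks.length : Int) 1).map
    (fun j => PySem.List.pyGetD toks j "" ++ "|" ++ PySem.List.pyGetD toks (j - 1) ""))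
  let feats := if toks = [] then feats0 else PySem.Set.add feats0 (PySem.List.pyGetD toks 0 "" ++ "|<s>")
  out.keys.foldl (fun o k =>
    if PySem.Set.contains feats k = true ∧ PySem.List.pyGetD (o.getD k []) i 0 = 0 then
      o.modify k [] (fun v => PySem.List.pySetD v i 1)
    else o) out

-- "mark position s with 1 if it currently holds 0", the common row update
def pvMarkN (s : Nat) (v : List Int) : List Int := if v.getD s 0 = 0 then v.set s 1 else v

-- the canonical guarded single-key update both loops reduce to
def pvUpd (F : String → List Int → List Int) (d : PySem.Dict String (List Int)) (k : String) : PySem.Dict String (List Int) :=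
  if d.contains k = true then d.modify k [] (F k) else d

-- B's per-key row transform
def pvFB (cand : PySem.Set String) (s : Nat) (k : String) (v : List Int) : List Int :=
  if PySem.Set.contains cand k = true then pvMarkN s v else v

-- named pieces of the two per-document steps, for the tightness proof
def pvA1 (dA : PySem.Dict String (List Int)) : PySem.Dict String (List Int) :=
  dA.keys.foldl (fun d k => d.modify k [] (fun v => v ++ [(0:Int)])) dA

def pvHeadKey (dA : PySem.Dict String (List Int)) (s : Nat) (t : List String) : String :=
  if (pvA1 dA).contains (PySem.List.pyGetD t (0:Int) "" ++ "|<s>") = true ∧ PySem.List.pyGetD ((pvA1 dA).getD (PySem.List.pyGetD t (0:Int) "" ++ "|<s>") []) ((s : Nat) : Int) 0 = 0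
  then (PySem.List.pyGetD t (0:Int) "" ++ "|<s>") else (PySem.List.pyGetD t (0:Int) "" ++ "|" ++ PySem.List.pyGetD t (-1) "")

def pvL (dA : PySem.Dict String (List Int)) (s : Nat) (t : List String) : List String :=
  pvHeadKey dA s t :: ((PySem.List.pyRange 1 (t.length : Int) 1).map (fun j => PySem.List.pyGetD t j "" ++ "|" ++ PySem.List.pyGetD t (j - 1) ""))

def pvCand (t : List String) : PySem.Set String :=
  if t = [] then PySem.Set.ofList ((PySem.List.pyRange 1 (t.length : Int) 1).map (fun j => PySem.List.pyGetD t j "" ++ "|" ++ PySem.List.pyGetD t (j - 1) "")) else PySem.Set.add (PySem.Set.ofList ((PySem.List.pyRange 1 (t.length : Int) 1).map (fun j => PySem.List.pyGetD t j "" ++ "|" ++ PySem.List.pyGetD t (j - 1) ""))) (PySem.List.pyGetD t (0:Int) "" ++ "|<s>")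


-- ---------- plain list facts ----------

lemma pv_getD_pad (v : List Int) (m s : Nat) :
    (v ++ List.replicate m (0:Int)).getD s 0 = v.getD s 0 := by
  rcases Nat.lt_or_ge s v.length with h | h
  · rw [List.getD_eq_getElem?_getD, List.getD_eq_getElem?_getD, List.getElem?_append_left h]
  · rw [List.getD_eq_getElem?_getD, List.getD_eq_getElem?_getD, List.getElem?_append_right h,
      List.getElem?_replicate]
    have h2 : v[s]? = none := by rw [List.getElem?_eq_none_iff]; exact h
    rw [h2]
    split <;> rfl

lemma pv_markN_pad (s : Nat) (w : List Int) (m : Nat) (h : s < w.length) :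
    pvMarkN s (w ++ List.replicate m (0:Int)) = pvMarkN s w ++ List.replicate m (0:Int) := by
  unfold pvMarkN
  rw [pv_getD_pad]
  split
  · rw [List.set_append, if_pos h]
  · rfl

lemma pv_getD_set_self (v : List Int) (s : Nat) :
    (v.set s (1:Int)).getD s 0 = if s < v.length then 1 else v.getD s 0 := by
  split
  · next h => rw [List.getD_eq_getElem?_getD, List.getElem?_set_self h]; rfl
  · next h => rw [List.set_eq_of_length_le (by omega)]

lemma pv_markN_idem (s : Nat) (v : List Int) : pvMarkN s (pvMarkN s v) = pvMarkN s v := by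
  unfold pvMarkN
  rcases Nat.lt_or_ge s v.length with hs | hs
  · by_cases h : v.getD s 0 = 0
    · simp only [h, if_true]
      rw [pv_getD_set_self, if_pos hs]
      norm_num
    · simp only [h, if_false]
  · have hv : v.set s 1 = v := List.set_eq_of_length_le hs
    by_cases h : v.getD s 0 = 0
    · simp [hv]
    · simp [hv]

lemma pv_length_markN (s : Nat) (v : List Int) : (pvMarkN s v).length = v.length := by
  unfold pvMarkN; split <;> simp

lemma pv_getD_markN_ne (s i' : Nat) (v : List Int) (h : i' ≠ s) :
    (pvMarkN s v).getD i' 0 = v.getD i' 0 := by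
  unfold pvMarkN
  split
  · rw [List.getD_eq_getElem?_getD, List.getD_eq_getElem?_getD, List.getElem?_set_ne (by omega)]
  · rfl

-- ---------- transport of dict observations along a keyed value-mapping of the items ----------

lemma pv_find?_snd (l : List (String × List Int)) (g : String → List Int → List Int) (k : String) :
    ((l.map (fun p => (p.1, g p.1 p.2))).find? (fun p => p.1 == k)).map (fun x => x.2)
      = (l.find? (fun p => p.1 == k)).map (fun p => g k p.2) := by
  induction l with
  | nil => rfl
  | cons p t ih =>
    by_cases hp : (p.1 == k) = true
    · have hk : p.1 = k := by simpa using hp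
      simp [hk]
    · simp only [List.map_cons, List.find?_cons, hp]
      simpa [hp] using ih

lemma pv_get?_map (d d' : PySem.Dict String (List Int)) (g : String → List Int → List Int)
    (h : d'.items = d.items.map (fun p => (p.1, g p.1 p.2))) (k : String) :
    d'.get? k = (d.get? k).map (g k) := by
  unfold PySem.Dict.get?
  rw [h, pv_find?_snd, Option.map_map]
  rfl

lemma pv_slot_map (d d' : PySem.Dict String (List Int)) (g : String → List Int → List Int)
    (h : d'.items = d.items.map (fun p => (p.1, g p.1 p.2))) (k : String) (i' : Nat)
    (hg : ∀ v, (g k v).getD i' 0 = v.getD i' 0) :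
    PySem.List.pyGetD (d'.getD k []) ((i' : Nat) : Int) 0 = PySem.List.pyGetD (d.getD k []) ((i' : Nat) : Int) 0 := by
  have h1 : d'.get? k = (d.get? k).map (g k) := pv_get?_map d d' g h k
  rcases hv : d.get? k with _ | v
  · rw [hv] at h1
    rw [PySem.Dict.getD_eq_get?_getD, PySem.Dict.getD_eq_get?_getD, hv, h1]
    rfl
  · rw [hv] at h1
    rw [PySem.Dict.getD_eq_get?_getD, PySem.Dict.getD_eq_get?_getD, hv, h1,
      Option.map_some, Option.getD_some, Option.getD_some,
      PySem.List.pyGetD_natCast, PySem.List.pyGetD_natCast]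
    exact hg v

lemma pv_keys_map' (d d' : PySem.Dict String (List Int)) (f : String × List Int → String × List Int)
    (h : d'.items = d.items.map f) (hf : ∀ p, (f p).1 = p.1) : d'.keys = d.keys := by
  unfold PySem.Dict.keys
  rw [h, List.map_map]
  exact List.map_congr_left (fun p _ => hf p)

lemma pv_contains_congr_keys (d d' : PySem.Dict String (List Int)) (h : d'.keys = d.keys) (k : String) :
    d'.contains k = d.contains k := by
  rw [PySem.Dict.contains_eq_decide_mem_keys, PySem.Dict.contains_eq_decide_mem_keys, h]

-- ---------- the canonical update and its folds ----------

lemma pv_insert_getD (d : PySem.Dict String (List Int)) (k : String)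
    (hc : d.contains k = true) (hnd : d.keys.Nodup) :
    d.insert k (d.getD k []) = d := by
  apply PySem.Dict.ext
  rw [PySem.Dict.items_insert_of_contains d _ hc]
  have hone : ∀ p ∈ d.items, (if (p.1 == k) = true then (k, d.getD k []) else p) = p := by
    intro p hp
    by_cases h1 : p.1 = k
    · have hb : (p.1 == k) = true := by simp [h1]
      have hv : d.getD k [] = p.2 := by
        have hm : (k, p.2) ∈ d.items := by rw [← h1]; exact hp
        exact PySem.Dict.getD_of_mem_items d hm hnd []
      rw [if_pos hb, hv, ← h1]
    · have hb : ¬ ((p.1 == k) = true) := by simp [h1]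
      rw [if_neg hb]
  rw [List.map_congr_left hone]
  simp

lemma pv_pvUpd_items (F : String → List Int → List Int) (d : PySem.Dict String (List Int)) (k : String)
    (hnd : d.keys.Nodup) :
    (pvUpd F d k).items = d.items.map (fun p => if p.1 = k then (p.1, F k p.2) else p) := by
  by_cases hc : d.contains k = true
  · have hU : pvUpd F d k = d.insert k (F k (d.getD k [])) := by
      simp [pvUpd, hc, PySem.Dict.modify]
    rw [hU, PySem.Dict.items_insert_of_contains d _ hc]
    apply List.map_congr_left
    intro p hp
    by_cases h1 : p.1 = k
    · have hb : (p.1 == k) = true := by simp [h1]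
      have hv : d.getD k [] = p.2 := by
        have hm : (k, p.2) ∈ d.items := by rw [← h1]; exact hp
        exact PySem.Dict.getD_of_mem_items d hm hnd []
      rw [if_pos hb, if_pos h1, hv, ← h1]
    · have hb : ¬ ((p.1 == k) = true) := by simp [h1]
      rw [if_neg hb, if_neg h1]
  · have hnk : ∀ p ∈ d.items, ¬ p.1 = k := by
      intro p hp he
      exact hc (by unfold PySem.Dict.contains; exact List.any_eq_true.mpr ⟨p, hp, by simp [he]⟩)
    have hU : pvUpd F d k = d := by simp [pvUpd, hc]
    rw [hU]
    have hone : ∀ p ∈ d.items, p = (if p.1 = k then (p.1, F k p.2) else p) := by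
      intro p hp
      rw [if_neg (hnk p hp)]
    rw [List.map_congr_left (fun p hp => (hone p hp).symm)]
    simp

lemma pv_keys_pvUpd (F : String → List Int → List Int) (d : PySem.Dict String (List Int)) (k : String)
    (hnd : d.keys.Nodup) : (pvUpd F d k).keys = d.keys := by
  apply pv_keys_map' d _ (fun p => if p.1 = k then (p.1, F k p.2) else p) (pv_pvUpd_items F d k hnd)
  intro p
  by_cases h1 : p.1 = k <;> simp [h1]

lemma pv_foldl_pvUpd_items (F : String → List Int → List Int) :
    ∀ (ks : List String) (d : PySem.Dict String (List Int)), d.keys.Nodup →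
      (ks.Nodup ∨ ∀ k v, F k (F k v) = F k v) →
      (ks.foldl (pvUpd F) d).items
        = d.items.map (fun p => if p.1 ∈ ks then (p.1, F p.1 p.2) else p) := by
  intro ks
  induction ks with
  | nil =>
    intro d hnd _
    simp
  | cons k tl ih =>
    intro d hnd hh
    have hnd' : (pvUpd F d k).keys.Nodup := by rw [pv_keys_pvUpd F d k hnd]; exact hnd
    have hh' : tl.Nodup ∨ ∀ k v, F k (F k v) = F k v := by
      rcases hh with h | h
      · exact Or.inl (List.Nodup.of_cons h)
      · exact Or.inr h
    rw [List.foldl_cons, ih _ hnd' hh', pv_pvUpd_items F d k hnd, List.map_map]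
    apply List.map_congr_left
    intro p hp
    by_cases h1 : p.1 = k
    · by_cases h2 : p.1 ∈ tl
      · rcases hh with hnk | hid
        · exact absurd (h1 ▸ h2) (List.nodup_cons.mp hnk).1
        · have h2' : k ∈ tl := h1 ▸ h2
          simp [Function.comp, h1, h2', hid k p.2]
      · have h2' : k ∉ tl := h1 ▸ h2
        simp [Function.comp, h1, h2']
    · by_cases h2 : p.1 ∈ tl <;> simp [Function.comp, h1, h2]

-- the append-0 loop of A is a fold of canonical updates
lemma pv_append_fold :
    ∀ (ks : List String) (d : PySem.Dict String (List Int)),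
      (∀ k ∈ ks, d.contains k = true) →
      ks.foldl (fun d k => d.modify k [] (fun v => v ++ [(0:Int)])) d
        = ks.foldl (pvUpd (fun _ v => v ++ [(0:Int)])) d := by
  intro ks
  induction ks with
  | nil => intro d _; rfl
  | cons k tl ih =>
    intro d hc
    rw [List.foldl_cons, List.foldl_cons,
      show pvUpd (fun _ v => v ++ [(0:Int)]) d k = d.modify k [] (fun v => v ++ [(0:Int)]) by
        simp [pvUpd, hc k (by simp)]]
    apply ih
    intro k' hk'
    rw [PySem.Dict.contains_modify]
    simp [hc k' (List.mem_cons_of_mem _ hk')]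

-- the guarded conditional update both programs perform at one key
lemma pv_guard (d : PySem.Dict String (List Int)) (k : String) (s : Nat) (hnd : d.keys.Nodup) :
    (if d.contains k = true ∧ PySem.List.pyGetD (d.getD k []) ((s : Nat) : Int) 0 = 0 then
        d.modify k [] (fun v => PySem.List.pySetD v ((s : Nat) : Int) 1)
      else d)
    = pvUpd (fun _ v => pvMarkN s v) d k := by
  by_cases hc : d.contains k = true
  · by_cases h0 : PySem.List.pyGetD (d.getD k []) ((s : Nat) : Int) 0 = 0
    · rw [if_pos ⟨hc, h0⟩]
      unfold pvUpd
      rw [if_pos hc]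
      unfold PySem.Dict.modify
      show d.insert k (PySem.List.pySetD (d.getD k []) ((s : Nat) : Int) 1)
        = d.insert k (pvMarkN s (d.getD k []))
      congr 1
      rw [PySem.List.pySetD_natCast]
      rw [PySem.List.pyGetD_natCast] at h0
      unfold pvMarkN
      rw [if_pos h0]
    · rw [if_neg (by tauto)]
      unfold pvUpd
      rw [if_pos hc]
      unfold PySem.Dict.modify
      show d = d.insert k (pvMarkN s (d.getD k []))
      have hFv : pvMarkN s (d.getD k []) = d.getD k [] := by
        rw [PySem.List.pyGetD_natCast] at h0
        unfold pvMarkN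
        rw [if_neg h0]
      rw [hFv, pv_insert_getD d k hc hnd]
  · rw [if_neg (by tauto)]
    unfold pvUpd
    rw [if_neg hc]

-- B's marking pass over the keys is a fold of canonical updates
lemma pv_b_fold (cand : PySem.Set String) (s : Nat) :
    ∀ (ks : List String) (o : PySem.Dict String (List Int)), o.keys.Nodup →
      (∀ k ∈ ks, o.contains k = true) →
      ks.foldl (fun o k =>
          if PySem.Set.contains cand k = true ∧ PySem.List.pyGetD (o.getD k []) ((s : Nat) : Int) 0 = 0 then
            o.modify k [] (fun v => PySem.List.pySetD v ((s : Nat) : Int) 1)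
          else o) o
        = ks.foldl (pvUpd (pvFB cand s)) o := by
  intro ks
  induction ks with
  | nil => intro o _ _; rfl
  | cons k tl ih =>
    intro o hnd hko
    have hck : o.contains k = true := hko k (by simp)
    have hstep : (if PySem.Set.contains cand k = true ∧ PySem.List.pyGetD (o.getD k []) ((s : Nat) : Int) 0 = 0 then
          o.modify k [] (fun v => PySem.List.pySetD v ((s : Nat) : Int) 1)
        else o) = pvUpd (pvFB cand s) o k := by
      by_cases hcand : PySem.Set.contains cand k = true
      · by_cases h0 : PySem.List.pyGetD (o.getD k []) ((s : Nat) : Int) 0 = 0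
        · rw [if_pos ⟨hcand, h0⟩]
          unfold pvUpd
          rw [if_pos hck]
          unfold PySem.Dict.modify
          show o.insert k (PySem.List.pySetD (o.getD k []) ((s : Nat) : Int) 1)
            = o.insert k (pvFB cand s k (o.getD k []))
          congr 1
          rw [PySem.List.pySetD_natCast]
          rw [PySem.List.pyGetD_natCast] at h0
          unfold pvFB pvMarkN
          rw [if_pos hcand, if_pos h0]
        · rw [if_neg (by tauto)]
          unfold pvUpd
          rw [if_pos hck]
          unfold PySem.Dict.modify
          show o = o.insert k (pvFB cand s k (o.getD k []))
          have hFv : pvFB cand s k (o.getD k []) = o.getD k [] := by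
            rw [PySem.List.pyGetD_natCast] at h0
            unfold pvFB pvMarkN
            rw [if_pos hcand, if_neg h0]
          rw [hFv, pv_insert_getD o k hck hnd]
      · rw [if_neg (by tauto)]
        unfold pvUpd
        rw [if_pos hck]
        unfold PySem.Dict.modify
        show o = o.insert k (pvFB cand s k (o.getD k []))
        have hFv : pvFB cand s k (o.getD k []) = o.getD k [] := by
          unfold pvFB
          rw [if_neg hcand]
        rw [hFv, pv_insert_getD o k hck hnd]
    rw [List.foldl_cons, List.foldl_cons, hstep]
    have hkeys : (pvUpd (pvFB cand s) o k).keys = o.keys := pv_keys_pvUpd _ o k hnd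
    apply ih
    · rw [hkeys]; exact hnd
    · intro k' hk'
      rw [pv_contains_congr_keys o _ hkeys k']
      exact hko k' (List.mem_cons_of_mem _ hk')

-- the tail of A's token loop (j >= 1) is a fold of canonical updates at the bigram keys
lemma pv_a_rest (t : List String) (s : Nat) :
    ∀ (js : List Int) (d : PySem.Dict String (List Int)), d.keys.Nodup →
      (∀ j ∈ js, 1 ≤ j ∧ j < (t.length : Int)) →
      js.foldl (fun d j =>
        if j = 0 ∧ d.contains (PySem.List.pyGetD t j "" ++ "|<s>") = true ∧
            PySem.List.pyGetD (d.getD (PySem.List.pyGetD t j "" ++ "|<s>") []) ((s : Nat) : Int) 0 = 0 then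
          d.modify (PySem.List.pyGetD t j "" ++ "|<s>") [] (fun v => PySem.List.pySetD v ((s : Nat) : Int) 1)
        else
          let d' := if d.contains (PySem.List.pyGetD t j "" ++ "|" ++ PySem.List.pyGetD t (j - 1) "") = true ∧
              PySem.List.pyGetD (d.getD (PySem.List.pyGetD t j "" ++ "|" ++ PySem.List.pyGetD t (j - 1) "") []) ((s : Nat) : Int) 0 = 0 then
              d.modify (PySem.List.pyGetD t j "" ++ "|" ++ PySem.List.pyGetD t (j - 1) "") [] (fun v => PySem.List.pySetD v ((s : Nat) : Int) 1)
            else d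
          if j = (t.length : Int) ∧ d'.contains ("</s>|" ++ PySem.List.pyGetD t j "") = true ∧
              PySem.List.pyGetD (d'.getD ("</s>|" ++ PySem.List.pyGetD t j "") []) ((s : Nat) : Int) 0 = 0 then
            d'.modify ("</s>|" ++ PySem.List.pyGetD t j "") [] (fun v => PySem.List.pySetD v ((s : Nat) : Int) 1)
          else d') d
      = js.foldl (fun d j => pvUpd (fun _ v => pvMarkN s v) d
          (PySem.List.pyGetD t j "" ++ "|" ++ PySem.List.pyGetD t (j - 1) "")) d := by
  intro js
  induction js with
  | nil => intro d _ _; rfl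
  | cons j tl ih =>
    intro d hnd hjs
    obtain ⟨hj1, hj2⟩ := hjs j (by simp)
    rw [List.foldl_cons, List.foldl_cons]
    have hstep : (if j = 0 ∧ d.contains (PySem.List.pyGetD t j "" ++ "|<s>") = true ∧
            PySem.List.pyGetD (d.getD (PySem.List.pyGetD t j "" ++ "|<s>") []) ((s : Nat) : Int) 0 = 0 then
          d.modify (PySem.List.pyGetD t j "" ++ "|<s>") [] (fun v => PySem.List.pySetD v ((s : Nat) : Int) 1)
        else
          let d' := if d.contains (PySem.List.pyGetD t j "" ++ "|" ++ PySem.List.pyGetD t (j - 1) "") = true ∧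
              PySem.List.pyGetD (d.getD (PySem.List.pyGetD t j "" ++ "|" ++ PySem.List.pyGetD t (j - 1) "") []) ((s : Nat) : Int) 0 = 0 then
              d.modify (PySem.List.pyGetD t j "" ++ "|" ++ PySem.List.pyGetD t (j - 1) "") [] (fun v => PySem.List.pySetD v ((s : Nat) : Int) 1)
            else d
          if j = (t.length : Int) ∧ d'.contains ("</s>|" ++ PySem.List.pyGetD t j "") = true ∧
              PySem.List.pyGetD (d'.getD ("</s>|" ++ PySem.List.pyGetD t j "") []) ((s : Nat) : Int) 0 = 0 then
            d'.modify ("</s>|" ++ PySem.List.pyGetD t j "") [] (fun v => PySem.List.pySetD v ((s : Nat) : Int) 1)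
          else d')
        = pvUpd (fun _ v => pvMarkN s v) d (PySem.List.pyGetD t j "" ++ "|" ++ PySem.List.pyGetD t (j - 1) "") := by
      rw [if_neg (by rintro ⟨h0, -⟩; omega)]
      show (if (j = (t.length : Int) ∧ _ ∧ _) then _ else _) = _
      rw [if_neg (by rintro ⟨h0, -⟩; omega)]
      exact pv_guard d _ s hnd
    rw [hstep]
    have hkeys : (pvUpd (fun _ v => pvMarkN s v) d (PySem.List.pyGetD t j "" ++ "|" ++ PySem.List.pyGetD t (j - 1) "")).keys = d.keys :=
      pv_keys_pvUpd _ d _ hnd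
    apply ih
    · rw [hkeys]; exact hnd
    · intro j' hj'
      exact hjs j' (List.mem_cons_of_mem _ hj')

-- A's j = 0 iteration chooses one key and performs the canonical update there
lemma pv_a_head (t : List String) (s : Nat) (d : PySem.Dict String (List Int))
    (hnd : d.keys.Nodup) (hlen0 : 0 < (t.length : Int)) :
    (if (0:Int) = 0 ∧ d.contains (PySem.List.pyGetD t (0:Int) "" ++ "|<s>") = true ∧
        PySem.List.pyGetD (d.getD (PySem.List.pyGetD t (0:Int) "" ++ "|<s>") []) ((s : Nat) : Int) 0 = 0 then
      d.modify (PySem.List.pyGetD t (0:Int) "" ++ "|<s>") [] (fun v => PySem.List.pySetD v ((s : Nat) : Int) 1)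
    else
      let d' := if d.contains (PySem.List.pyGetD t (0:Int) "" ++ "|" ++ PySem.List.pyGetD t ((0:Int) - 1) "") = true ∧
          PySem.List.pyGetD (d.getD (PySem.List.pyGetD t (0:Int) "" ++ "|" ++ PySem.List.pyGetD t ((0:Int) - 1) "") []) ((s : Nat) : Int) 0 = 0 then
          d.modify (PySem.List.pyGetD t (0:Int) "" ++ "|" ++ PySem.List.pyGetD t ((0:Int) - 1) "") [] (fun v => PySem.List.pySetD v ((s : Nat) : Int) 1)
        else d
      if (0:Int) = (t.length : Int) ∧ d'.contains ("</s>|" ++ PySem.List.pyGetD t (0:Int) "") = true ∧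
          PySem.List.pyGetD (d'.getD ("</s>|" ++ PySem.List.pyGetD t (0:Int) "") []) ((s : Nat) : Int) 0 = 0 then
        d'.modify ("</s>|" ++ PySem.List.pyGetD t (0:Int) "") [] (fun v => PySem.List.pySetD v ((s : Nat) : Int) 1)
      else d')
    = pvUpd (fun _ v => pvMarkN s v) d
        (if d.contains (PySem.List.pyGetD t (0:Int) "" ++ "|<s>") = true ∧
            PySem.List.pyGetD (d.getD (PySem.List.pyGetD t (0:Int) "" ++ "|<s>") []) ((s : Nat) : Int) 0 = 0
          then PySem.List.pyGetD t (0:Int) "" ++ "|<s>"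
          else PySem.List.pyGetD t (0:Int) "" ++ "|" ++ PySem.List.pyGetD t ((0:Int) - 1) "") := by
  by_cases hc0 : d.contains (PySem.List.pyGetD t (0:Int) "" ++ "|<s>") = true ∧
      PySem.List.pyGetD (d.getD (PySem.List.pyGetD t (0:Int) "" ++ "|<s>") []) ((s : Nat) : Int) 0 = 0
  · rw [if_pos ⟨rfl, hc0.1, hc0.2⟩, if_pos hc0]
    have h := pv_guard d (PySem.List.pyGetD t (0:Int) "" ++ "|<s>") s hnd
    rw [if_pos ⟨hc0.1, hc0.2⟩] at h
    exact h
  · rw [if_neg (by rintro ⟨-, h1, h2⟩; exact hc0 ⟨h1, h2⟩), if_neg hc0]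
    show (if ((0:Int) = (t.length : Int) ∧ _ ∧ _) then _ else _) = _
    rw [if_neg (by rintro ⟨h0, -⟩; omega)]
    exact pv_guard d _ s hnd

-- bridging A's index loop over range(len(data)) to a structural loop over enumerate(data)
lemma pv_bridge {β : Type} (f : β → Int → List String → β) (dflt : List String) :
    ∀ (xs pre : List (List String)) (init : β),
      (PySem.List.pyRange (pre.length : Int) ((pre.length : Int) + (xs.length : Int)) 1).foldl
          (fun a i => f a i (PySem.List.pyGetD (pre ++ xs) i dflt)) init
        = (PySem.List.enumerate xs (pre.length : Int)).foldl (fun a p => f a p.1 p.2) init := by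
  intro xs
  induction xs with
  | nil =>
    intro pre init
    rw [PySem.List.pyRange_one_eq_nil (by simp), PySem.List.enumerate_nil]
    rfl
  | cons x tl ih =>
    intro pre init
    rw [PySem.List.pyRange_one_cons
        (by have h0 : 0 < ((x :: tl).length : Int) := by exact_mod_cast Nat.succ_pos tl.length
            omega),
      List.foldl_cons, PySem.List.enumerate_cons, List.foldl_cons]
    have hx : PySem.List.pyGetD (pre ++ x :: tl) (pre.length : Int) dflt = x := by
      rw [PySem.List.pyGetD_natCast, List.getD_eq_getElem?_getD,
        List.getElem?_append_right (Nat.le_refl _)]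
      simp
    rw [hx]
    have h := ih (pre ++ [x]) (f init (pre.length : Int) x)
    have e1 : (((pre ++ [x]).length : Nat) : Int) = (pre.length : Int) + 1 := by simp
    rw [e1, List.append_assoc] at h
    have e2 : (pre.length : Int) + ((x :: tl).length : Int) = (pre.length : Int) + 1 + (tl.length : Int) := by
      push_cast [List.length_cons]
      ring
    rw [e2]
    simpa using h

lemma pv_bridge0 {β : Type} (f : β → Int → List String → β) (dflt : List String)
    (xs : List (List String)) (init : β) :
    (PySem.List.pyRange 0 (xs.length : Int) 1).foldl
        (fun a i => f a i (PySem.List.pyGetD xs i dflt)) init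
      = (PySem.List.enumerate xs 0).foldl (fun a p => f a p.1 p.2) init := by
  have h := pv_bridge f dflt xs [] init
  simpa using h

-- a marking pass whose candidate set contains no key is a no-op
lemma pv_fold_noop (cand : PySem.Set String) (s : Nat)
    (hc : ∀ k : String, PySem.Set.contains cand k = false) :
    ∀ (ks : List String) (o : PySem.Dict String (List Int)),
      ks.foldl (fun o k =>
          if PySem.Set.contains cand k = true ∧ PySem.List.pyGetD (o.getD k []) ((s : Nat) : Int) 0 = 0 then
            o.modify k [] (fun v => PySem.List.pySetD v ((s : Nat) : Int) 1)
          else o) o = o := by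
  intro ks
  induction ks with
  | nil => intro o; rfl
  | cons k tl ih =>
    intro o
    rw [List.foldl_cons, if_neg (by rw [hc k]; simp)]
    exact ih o

-- ---------- the per-document step ----------

-- bridges between the closed-form pvFire and the pyGetD/pyRange terms of the ports
lemma pv_headI (t : List String) (ht : t ≠ []) : t.headI = PySem.List.pyGetD t (0:Int) "" := by
  cases t with
  | nil => exact absurd rfl ht
  | cons x xs => rw [PySem.List.pyGetD_zero_cons]; rfl

lemma pv_lastD (t : List String) (ht : t ≠ []) : t.getLastD "" = PySem.List.pyGetD t (-1) "" := by
  rw [PySem.List.pyGetD_neg_one t "" ht, List.getLastD_eq_getLast?, List.getLast?_eq_some_getLast ht]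
  rfl

lemma pv_bigrams_mem (t : List String) (w : String) :
    (w ∈ t.tail.zipWith (· ++ "|" ++ ·) t)
      ↔ w ∈ (PySem.List.pyRange 1 (t.length : Int) 1).map
          (fun j => PySem.List.pyGetD t j "" ++ "|" ++ PySem.List.pyGetD t (j - 1) "") := by
  simp only [List.mem_map]
  constructor
  · intro hp
    obtain ⟨k, hk, hk2⟩ := List.mem_iff_getElem.mp hp
    have hkt : k + 1 < t.length := by
      simp [List.length_zipWith] at hk
      omega
    refine ⟨((k + 1 : Nat) : Int), ?_, ?_⟩
    · rw [PySem.List.mem_pyRange_one]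
      constructor
      · exact_mod_cast Nat.le_add_left 1 k
      · exact_mod_cast hkt
    · have hz : (t.tail.zipWith (· ++ "|" ++ ·) t)[k]'hk
          = t.tail[k]'(by simp; omega) ++ "|" ++ t[k]'(by omega) := List.getElem_zipWith ..
      have htl : t.tail[k]'(by simp; omega) = t[k+1]'hkt := by
        rw [List.getElem_tail]
      have e1 : PySem.List.pyGetD t ((k + 1 : Nat) : Int) "" = t[k+1]'hkt := by
        rw [PySem.List.pyGetD_natCast, List.getD_eq_getElem t "" hkt]
      have e2 : PySem.List.pyGetD t (((k + 1 : Nat) : Int) - 1) "" = t[k]'(by omega) := by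
        rw [show ((k + 1 : Nat) : Int) - 1 = ((k : Nat) : Int) by push_cast; ring,
          PySem.List.pyGetD_natCast, List.getD_eq_getElem t "" (by omega)]
      rw [← hk2, hz, htl, e1, e2]
  · rintro ⟨j, hj, rfl⟩
    rw [PySem.List.mem_pyRange_one] at hj
    obtain ⟨n, rfl⟩ := Int.eq_ofNat_of_zero_le (show (0:Int) ≤ j by omega)
    have hn1 : 1 ≤ n := by exact_mod_cast hj.1
    have hn2 : n < t.length := by exact_mod_cast hj.2
    have hkz : n - 1 < (t.tail.zipWith (· ++ "|" ++ ·) t).length := by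
      simp [List.length_zipWith]
      omega
    apply List.mem_iff_getElem.mpr
    refine ⟨n - 1, hkz, ?_⟩
    have hz : (t.tail.zipWith (· ++ "|" ++ ·) t)[n-1]'hkz
        = t.tail[n-1]'(by simp; omega) ++ "|" ++ t[n-1]'(by omega) := List.getElem_zipWith ..
    have htl : t.tail[n-1]'(by simp; omega) = t[n]'hn2 := by
      rw [List.getElem_tail]
      congr 1
      omega
    have e1 : PySem.List.pyGetD t ((n : Nat) : Int) "" = t[n]'hn2 := by
      rw [PySem.List.pyGetD_natCast, List.getD_eq_getElem t "" hn2]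
    have e2 : PySem.List.pyGetD t (((n : Nat) : Int) - 1) "" = t[n-1]'(by omega) := by
      rw [show ((n : Nat) : Int) - 1 = ((n - 1 : Nat) : Int) by push_cast [hn1]; ring,
        PySem.List.pyGetD_natCast, List.getD_eq_getElem t "" (by omega)]
    rw [hz, htl, e1, e2]

lemma pv_doc_step (s m : Nat) (t : List String) (d0 dA dB : PySem.Dict String (List Int))
    (hnd : dA.keys.Nodup)
    (hkeys : dA.keys = d0.keys)
    (hpad : dB.items = dA.items.map (fun p => (p.1, p.2 ++ List.replicate (m+1) (0:Int))))
    (hlen : ∀ p ∈ dA.items, s ≤ p.2.length)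
    (hslot : ∀ k, PySem.List.pyGetD (dA.getD k []) ((s : Nat) : Int) 0 = PySem.List.pyGetD (d0.getD k []) ((s : Nat) : Int) 0)
    (hfire : pvFire d0 ((s : Nat) : Int) t = false) :
    (pvAStep dA ((s : Nat) : Int) t).keys = dA.keys ∧
    (∀ p ∈ (pvAStep dA ((s : Nat) : Int) t).items, s + 1 ≤ p.2.length) ∧
    (pvBStep dB ((s : Nat) : Int) t).items
      = (pvAStep dA ((s : Nat) : Int) t).items.map (fun p => (p.1, p.2 ++ List.replicate m (0:Int))) ∧
    (∀ k (i' : Nat), s + 1 ≤ i' →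
      PySem.List.pyGetD ((pvAStep dA ((s : Nat) : Int) t).getD k []) ((i' : Nat) : Int) 0
        = PySem.List.pyGetD (dA.getD k []) ((i' : Nat) : Int) 0) := by
  have hA1 : (dA.keys.foldl (fun d k => d.modify k [] (fun v => v ++ [(0:Int)])) dA).items
      = dA.items.map (fun p => (p.1, p.2 ++ [(0:Int)])) := by
    rw [pv_append_fold dA.keys dA (fun k hk => (PySem.Dict.contains_iff_mem_keys dA k).mpr hk),
      pv_foldl_pvUpd_items _ dA.keys dA hnd (Or.inl hnd)]
    apply List.map_congr_left
    intro p hp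
    rw [if_pos (show p.1 ∈ dA.keys from List.mem_map_of_mem hp)]
  set A1 := dA.keys.foldl (fun d k => d.modify k [] (fun v => v ++ [(0:Int)])) dA with hA1def
  have hkA1 : A1.keys = dA.keys := by
    apply pv_keys_map' dA A1 (fun p => (p.1, p.2 ++ [(0:Int)])) hA1
    intro p; rfl
  have hndA1 : A1.keys.Nodup := by rw [hkA1]; exact hnd
  have hkB : dB.keys = dA.keys := by
    apply pv_keys_map' dA dB (fun p => (p.1, p.2 ++ List.replicate (m+1) (0:Int))) hpad
    intro p; rfl
  have hndB : dB.keys.Nodup := by rw [hkB]; exact hnd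
  have hlenA1 : ∀ p ∈ A1.items, s + 1 ≤ p.2.length := by
    rw [hA1]
    intro p hp
    obtain ⟨q, hq, rfl⟩ := List.mem_map.mp hp
    have := hlen q hq
    simp
    omega
  have hcontA1 : ∀ k, A1.contains k = dA.contains k :=
    fun k => pv_contains_congr_keys dA A1 hkA1 k
  have hcontD0 : ∀ k, dA.contains k = d0.contains k :=
    fun k => pv_contains_congr_keys d0 dA hkeys k
  have hslotA1 : ∀ k, PySem.List.pyGetD (A1.getD k []) ((s : Nat) : Int) 0
      = PySem.List.pyGetD (d0.getD k []) ((s : Nat) : Int) 0 := by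
    intro k
    have h1 := pv_slot_map dA A1 (fun _ v => v ++ [(0:Int)]) hA1 k s
      (fun v => by
        rw [show ([(0:Int)] : List Int) = List.replicate 1 (0:Int) from rfl, pv_getD_pad])
    rw [h1, hslot k]
  by_cases ht : t = []
  · -- empty document: A appends the zero column, B's feature set is empty
    subst ht
    have hAe : pvAStep dA ((s : Nat) : Int) [] = A1 := by
      unfold pvAStep
      rw [← hA1def, PySem.List.pyRange_one_eq_nil (by simp)]
      rfl
    have hcF : ∀ k : String, PySem.Set.contains (PySem.Set.ofList
        ((PySem.List.pyRange 1 ((([] : List String)).length : Int) 1).map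
          (fun j => PySem.List.pyGetD ([] : List String) j "" ++ "|" ++ PySem.List.pyGetD ([] : List String) (j - 1) ""))) k = false := by
      intro k
      rw [PySem.List.pyRange_one_eq_nil (by norm_num)]
      rfl
    have hBe : pvBStep dB ((s : Nat) : Int) [] = dB :=
      pv_fold_noop _ s hcF dB.keys dB
    refine ⟨?_, ?_, ?_, ?_⟩
    · rw [hAe]; exact hkA1
    · rw [hAe]; exact hlenA1
    · rw [hAe, hBe, hA1, List.map_map, hpad]
      apply List.map_congr_left
      intro p hp
      simp [Function.comp, List.append_assoc, List.replicate_succ]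
    · intro k i' hi'
      rw [hAe]
      exact pv_slot_map dA A1 (fun _ v => v ++ [(0:Int)]) hA1 k i'
        (fun v => by
          rw [show ([(0:Int)] : List Int) = List.replicate 1 (0:Int) from rfl, pv_getD_pad])
  · -- nonempty document
    have hlen0 : 0 < (t.length : Int) := by
      have hne : t.length ≠ 0 := fun h => ht (List.eq_nil_of_length_eq_zero h)
      omega
    -- A's step is the fold of canonical updates over the chosen head key and the bigram keys
    have hstepA : pvAStep dA ((s : Nat) : Int) t
        = ((if (A1.contains (PySem.List.pyGetD t (0:Int) "" ++ "|<s>") = true ∧ PySem.List.pyGetD (A1.getD (PySem.List.pyGetD t (0:Int) "" ++ "|<s>") []) ((s : Nat) : Int) 0 = 0) then (PySem.List.pyGetD t (0:Int) "" ++ "|<s>") else (PySem.List.pyGetD t (0:Int) "" ++ "|" ++ PySem.List.pyGetD t (-1) "")) :: ((PySem.List.pyRange 1 (t.length : Int) 1).map (fun j => PySem.List.pyGetD t j "" ++ "|" ++ PySem.List.pyGetD t (j - 1) ""))).foldl (pvUpd (fun _ v => pvMarkN s v)) A1 := by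
      unfold pvAStep
      rw [← hA1def]
      show (PySem.List.pyRange 0 (t.length : Int) 1).foldl _ A1 = _
      rw [PySem.List.pyRange_one_cons hlen0, List.foldl_cons,
        pv_a_head t s A1 hndA1 hlen0,
        pv_a_rest t s _ _
          (by rw [pv_keys_pvUpd _ A1 _ hndA1]; exact hndA1)
          (by intro j hj
              rw [PySem.List.mem_pyRange_one] at hj
              exact ⟨by omega, hj.2⟩),
        ← List.foldl_map, show ((0:Int) + 1) = (1:Int) by norm_num, List.foldl_cons,
        show PySem.List.pyGetD t ((0:Int) - 1) "" = PySem.List.pyGetD t (-1) "" from rfl]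
    have hitemsA : (pvAStep dA ((s : Nat) : Int) t).items
        = A1.items.map (fun p => if p.1 ∈ ((if (A1.contains (PySem.List.pyGetD t (0:Int) "" ++ "|<s>") = true ∧ PySem.List.pyGetD (A1.getD (PySem.List.pyGetD t (0:Int) "" ++ "|<s>") []) ((s : Nat) : Int) 0 = 0) then (PySem.List.pyGetD t (0:Int) "" ++ "|<s>") else (PySem.List.pyGetD t (0:Int) "" ++ "|" ++ PySem.List.pyGetD t (-1) "")) :: ((PySem.List.pyRange 1 (t.length : Int) 1).map (fun j => PySem.List.pyGetD t j "" ++ "|" ++ PySem.List.pyGetD t (j - 1) ""))) then (p.1, pvMarkN s p.2) else p) := by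
      rw [hstepA, pv_foldl_pvUpd_items _ _ _ hndA1 (Or.inr (fun _ v => pv_markN_idem s v))]
    have hitemsA2 : (pvAStep dA ((s : Nat) : Int) t).items
        = dA.items.map (fun q => (q.1, if q.1 ∈ ((if (A1.contains (PySem.List.pyGetD t (0:Int) "" ++ "|<s>") = true ∧ PySem.List.pyGetD (A1.getD (PySem.List.pyGetD t (0:Int) "" ++ "|<s>") []) ((s : Nat) : Int) 0 = 0) then (PySem.List.pyGetD t (0:Int) "" ++ "|<s>") else (PySem.List.pyGetD t (0:Int) "" ++ "|" ++ PySem.List.pyGetD t (-1) "")) :: ((PySem.List.pyRange 1 (t.length : Int) 1).map (fun j => PySem.List.pyGetD t j "" ++ "|" ++ PySem.List.pyGetD t (j - 1) ""))) then pvMarkN s (q.2 ++ [(0:Int)]) else q.2 ++ [(0:Int)])) := by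
      rw [hitemsA, hA1, List.map_map]
      apply List.map_congr_left
      intro q hq
      simp only [Function.comp_apply]

      by_cases h1 : q.1 ∈ ((if (A1.contains (PySem.List.pyGetD t (0:Int) "" ++ "|<s>") = true ∧ PySem.List.pyGetD (A1.getD (PySem.List.pyGetD t (0:Int) "" ++ "|<s>") []) ((s : Nat) : Int) 0 = 0) then (PySem.List.pyGetD t (0:Int) "" ++ "|<s>") else (PySem.List.pyGetD t (0:Int) "" ++ "|" ++ PySem.List.pyGetD t (-1) "")) :: ((PySem.List.pyRange 1 (t.length : Int) 1).map (fun j => PySem.List.pyGetD t j "" ++ "|" ++ PySem.List.pyGetD t (j - 1) "")))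
      · rw [if_pos h1, if_pos h1]
      · rw [if_neg h1, if_neg h1]
    -- B's step
    have hstepB : pvBStep dB ((s : Nat) : Int) t
        = dB.keys.foldl (pvUpd (pvFB (PySem.Set.add (PySem.Set.ofList ((PySem.List.pyRange 1 (t.length : Int) 1).map (fun j => PySem.List.pyGetD t j "" ++ "|" ++ PySem.List.pyGetD t (j - 1) ""))) (PySem.List.pyGetD t (0:Int) "" ++ "|<s>")) s)) dB := by
      have h1 : pvBStep dB ((s : Nat) : Int) t
          = dB.keys.foldl (fun o k =>
              if PySem.Set.contains (PySem.Set.add (PySem.Set.ofList ((PySem.List.pyRange 1 (t.length : Int) 1).map (fun j => PySem.List.pyGetD t j "" ++ "|" ++ PySem.List.pyGetD t (j - 1) ""))) (PySem.List.pyGetD t (0:Int) "" ++ "|<s>")) k = true ∧ PySem.List.pyGetD (o.getD k []) ((s : Nat) : Int) 0 = 0 then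
                o.modify k [] (fun v => PySem.List.pySetD v ((s : Nat) : Int) 1)
              else o) dB := by
        unfold pvBStep
        simp only [if_neg ht]
      rw [h1, pv_b_fold (PySem.Set.add (PySem.Set.ofList ((PySem.List.pyRange 1 (t.length : Int) 1).map (fun j => PySem.List.pyGetD t j "" ++ "|" ++ PySem.List.pyGetD t (j - 1) ""))) (PySem.List.pyGetD t (0:Int) "" ++ "|<s>")) s dB.keys dB hndB (fun k hk => (PySem.Dict.contains_iff_mem_keys dB k).mpr hk)]
    have hitemsB : (pvBStep dB ((s : Nat) : Int) t).items
        = dB.items.map (fun p => if p.1 ∈ dB.keys then (p.1, pvFB (PySem.Set.add (PySem.Set.ofList ((PySem.List.pyRange 1 (t.length : Int) 1).map (fun j => PySem.List.pyGetD t j "" ++ "|" ++ PySem.List.pyGetD t (j - 1) ""))) (PySem.List.pyGetD t (0:Int) "" ++ "|<s>")) s p.1 p.2) else p) := by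
      rw [hstepB, pv_foldl_pvUpd_items _ _ _ hndB (Or.inl hndB)]
    -- the wraparound condition is refuted by hfire
    have hfire' : ¬(d0.contains (PySem.List.pyGetD t (0:Int) "" ++ "|" ++ PySem.List.pyGetD t (-1) "") = true ∧ PySem.List.pyGetD (d0.getD (PySem.List.pyGetD t (0:Int) "" ++ "|" ++ PySem.List.pyGetD t (-1) "") []) ((s : Nat) : Int) 0 = 0 ∧
        ¬(d0.contains (PySem.List.pyGetD t (0:Int) "" ++ "|<s>") = true ∧ PySem.List.pyGetD (d0.getD (PySem.List.pyGetD t (0:Int) "" ++ "|<s>") []) ((s : Nat) : Int) 0 = 0) ∧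
        (PySem.List.pyGetD t (0:Int) "" ++ "|" ++ PySem.List.pyGetD t (-1) "") ∉ ((PySem.List.pyRange 1 (t.length : Int) 1).map (fun j => PySem.List.pyGetD t j "" ++ "|" ++ PySem.List.pyGetD t (j - 1) ""))) := by
      rintro ⟨h1, h2, h3, h4⟩
      have htrue : pvFire d0 ((s : Nat) : Int) t = true := by
        unfold pvFire
        rw [pv_headI t ht, pv_lastD t ht]
        have h2' : ((d0.getD (PySem.List.pyGetD t (0:Int) "" ++ "|" ++ PySem.List.pyGetD t (-1) "") []) : List Int).getD s 0 = 0 := by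
          rw [← PySem.List.pyGetD_natCast]
          exact h2
        have hopenw : pvOpen d0 ((s : Nat) : Int) (PySem.List.pyGetD t (0:Int) "" ++ "|" ++ PySem.List.pyGetD t (-1) "") = true := by
          simp [pvOpen, h1]
          rw [← List.getD_eq_getElem?_getD]
          exact h2'
        have hopenk : pvOpen d0 ((s : Nat) : Int) (PySem.List.pyGetD t (0:Int) "" ++ "|<s>") = false := by
          cases hck : d0.contains (PySem.List.pyGetD t (0:Int) "" ++ "|<s>") with
          | false => simp [pvOpen, hck]
          | true =>
            simp [pvOpen, hck]
            intro hh
            exact absurd ⟨hck, by rw [PySem.List.pyGetD_natCast, List.getD_eq_getElem?_getD]; exact hh⟩ h3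
        have hnin : (PySem.List.pyGetD t (0:Int) "" ++ "|" ++ PySem.List.pyGetD t (-1) "")
            ∉ t.tail.zipWith (· ++ "|" ++ ·) t :=
          fun hm => h4 ((pv_bigrams_mem t _).mp hm)
        have hte : t.isEmpty = false := by simp [ht]
        rw [hopenw, hopenk, hte]
        simp only [Bool.not_false, Bool.true_and, Bool.and_eq_true, decide_eq_true_eq]
        exact hnin
      rw [hfire] at htrue
      exact Bool.false_ne_true htrue
    refine ⟨?_, ?_, ?_, ?_⟩
    · apply pv_keys_map' dA _ (fun q => (q.1, if q.1 ∈ ((if (A1.contains (PySem.List.pyGetD t (0:Int) "" ++ "|<s>") = true ∧ PySem.List.pyGetD (A1.getD (PySem.List.pyGetD t (0:Int) "" ++ "|<s>") []) ((s : Nat) : Int) 0 = 0) then (PySem.List.pyGetD t (0:Int) "" ++ "|<s>") else (PySem.List.pyGetD t (0:Int) "" ++ "|" ++ PySem.List.pyGetD t (-1) "")) :: ((PySem.List.pyRange 1 (t.length : Int) 1).map (fun j => PySem.List.pyGetD t j "" ++ "|" ++ PySem.List.pyGetD t (j - 1) ""))) then pvMarkN s (q.2 ++ [(0:Int)]) else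 q.2 ++ [(0:Int)])) hitemsA2
      intro q; rfl
    · intro p hp
      rw [hitemsA2] at hp
      obtain ⟨q, hq, rfl⟩ := List.mem_map.mp hp
      have hq1 := hlen q hq
      by_cases h1 : q.1 ∈ ((if (A1.contains (PySem.List.pyGetD t (0:Int) "" ++ "|<s>") = true ∧ PySem.List.pyGetD (A1.getD (PySem.List.pyGetD t (0:Int) "" ++ "|<s>") []) ((s : Nat) : Int) 0 = 0) then (PySem.List.pyGetD t (0:Int) "" ++ "|<s>") else (PySem.List.pyGetD t (0:Int) "" ++ "|" ++ PySem.List.pyGetD t (-1) "")) :: ((PySem.List.pyRange 1 (t.length : Int) 1).map (fun j => PySem.List.pyGetD t j "" ++ "|" ++ PySem.List.pyGetD t (j - 1) "")))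
      · rw [if_pos h1, pv_length_markN]
        simp
        omega
      · rw [if_neg h1]
        simp
        omega
    · rw [hitemsB, hpad, List.map_map, hitemsA2, List.map_map]
      apply List.map_congr_left
      intro q hq
      have hqk : q.1 ∈ dA.keys := List.mem_map_of_mem hq
      have hql : s ≤ q.2.length := hlen q hq
      have hu : s < (q.2 ++ [(0:Int)]).length := by simp; omega
      have hgetA1 : A1.getD q.1 [] = q.2 ++ [(0:Int)] := by
        apply PySem.Dict.getD_of_mem_items A1 _ hndA1
        rw [hA1]
        exact List.mem_map.mpr ⟨q, hq, rfl⟩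
      have hmemB : q.1 ∈ dB.keys := by rw [hkB]; exact hqk
      have hAc : A1.contains q.1 = true := by
        rw [hcontA1]
        exact (PySem.Dict.contains_iff_mem_keys dA q.1).mpr hqk
      have hrep : q.2 ++ List.replicate (m+1) (0:Int) = (q.2 ++ [(0:Int)]) ++ List.replicate m (0:Int) := by
        rw [List.append_assoc]
        rfl
      simp only [Function.comp_apply]
      rw [if_pos hmemB, hrep]
      unfold pvFB
      by_cases hRBq : q.1 ∈ ((PySem.List.pyRange 1 (t.length : Int) 1).map (fun j => PySem.List.pyGetD t j "" ++ "|" ++ PySem.List.pyGetD t (j - 1) ""))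
      · have hcq : PySem.Set.contains (PySem.Set.add (PySem.Set.ofList ((PySem.List.pyRange 1 (t.length : Int) 1).map (fun j => PySem.List.pyGetD t j "" ++ "|" ++ PySem.List.pyGetD t (j - 1) ""))) (PySem.List.pyGetD t (0:Int) "" ++ "|<s>")) q.1 = true :=
          (PySem.Set.contains_iff _ _).mpr ((PySem.Set.mem_add _ _ _).mpr (Or.inl ((PySem.Set.mem_ofList _ _).mpr hRBq)))
        rw [if_pos hcq, if_pos (List.mem_cons_of_mem _ hRBq), pv_markN_pad s _ m hu]
      · by_cases hk0q : q.1 = (PySem.List.pyGetD t (0:Int) "" ++ "|<s>")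
        · have hcq : PySem.Set.contains (PySem.Set.add (PySem.Set.ofList ((PySem.List.pyRange 1 (t.length : Int) 1).map (fun j => PySem.List.pyGetD t j "" ++ "|" ++ PySem.List.pyGetD t (j - 1) ""))) (PySem.List.pyGetD t (0:Int) "" ++ "|<s>")) q.1 = true :=
            (PySem.Set.contains_iff _ _).mpr ((PySem.Set.mem_add _ _ _).mpr (Or.inr hk0q))
          rw [if_pos hcq]
          by_cases hc0 : (A1.contains (PySem.List.pyGetD t (0:Int) "" ++ "|<s>") = true ∧ PySem.List.pyGetD (A1.getD (PySem.List.pyGetD t (0:Int) "" ++ "|<s>") []) ((s : Nat) : Int) 0 = 0)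
          · rw [if_pos (List.mem_cons.mpr (Or.inl (by rw [if_pos hc0]; exact hk0q))),
              pv_markN_pad s _ m hu]
          · have hs0 : ¬ ((q.2 ++ [(0:Int)]).getD s 0 = 0) := by
              intro h0
              apply hc0
              constructor
              · rw [← hk0q]; exact hAc
              · rw [← hk0q, hgetA1, PySem.List.pyGetD_natCast]; exact h0
            have hmkm : pvMarkN s ((q.2 ++ [(0:Int)]) ++ List.replicate m (0:Int))
                = (q.2 ++ [(0:Int)]) ++ List.replicate m (0:Int) := by
              unfold pvMarkN
              rw [pv_getD_pad]
              exact if_neg hs0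
            have hmk0 : pvMarkN s (q.2 ++ [(0:Int)]) = q.2 ++ [(0:Int)] := by
              unfold pvMarkN
              exact if_neg hs0
            rw [hmkm]
            by_cases h1 : q.1 ∈ ((if (A1.contains (PySem.List.pyGetD t (0:Int) "" ++ "|<s>") = true ∧ PySem.List.pyGetD (A1.getD (PySem.List.pyGetD t (0:Int) "" ++ "|<s>") []) ((s : Nat) : Int) 0 = 0) then (PySem.List.pyGetD t (0:Int) "" ++ "|<s>") else (PySem.List.pyGetD t (0:Int) "" ++ "|" ++ PySem.List.pyGetD t (-1) "")) :: ((PySem.List.pyRange 1 (t.length : Int) 1).map (fun j => PySem.List.pyGetD t j "" ++ "|" ++ PySem.List.pyGetD t (j - 1) "")))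
            · rw [if_pos h1, hmk0]
            · rw [if_neg h1]
        · have hcq : ¬ (PySem.Set.contains (PySem.Set.add (PySem.Set.ofList ((PySem.List.pyRange 1 (t.length : Int) 1).map (fun j => PySem.List.pyGetD t j "" ++ "|" ++ PySem.List.pyGetD t (j - 1) ""))) (PySem.List.pyGetD t (0:Int) "" ++ "|<s>")) q.1 = true) := by
            intro hk
            rcases (PySem.Set.mem_add _ _ _).mp ((PySem.Set.contains_iff _ _).mp hk) with h | h
            · exact hRBq ((PySem.Set.mem_ofList _ _).mp h)
            · exact hk0q h
          rw [if_neg hcq]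
          by_cases hc0 : (A1.contains (PySem.List.pyGetD t (0:Int) "" ++ "|<s>") = true ∧ PySem.List.pyGetD (A1.getD (PySem.List.pyGetD t (0:Int) "" ++ "|<s>") []) ((s : Nat) : Int) 0 = 0)
          · rw [if_neg (show ¬ q.1 ∈ ((if (A1.contains (PySem.List.pyGetD t (0:Int) "" ++ "|<s>") = true ∧ PySem.List.pyGetD (A1.getD (PySem.List.pyGetD t (0:Int) "" ++ "|<s>") []) ((s : Nat) : Int) 0 = 0) then (PySem.List.pyGetD t (0:Int) "" ++ "|<s>") else (PySem.List.pyGetD t (0:Int) "" ++ "|" ++ PySem.List.pyGetD t (-1) "")) :: ((PySem.List.pyRange 1 (t.length : Int) 1).map (fun j => PySem.List.pyGetD t j "" ++ "|" ++ PySem.List.pyGetD t (j - 1) ""))) from by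
              intro hm
              rcases List.mem_cons.mp hm with h | h
              · rw [if_pos hc0] at h; exact hk0q h
              · exact hRBq h)]
          · by_cases hwq : q.1 = (PySem.List.pyGetD t (0:Int) "" ++ "|" ++ PySem.List.pyGetD t (-1) "")
            · -- A's wraparound mark is a no-op here because pvFire is false
              have hk0d0 : ¬(d0.contains (PySem.List.pyGetD t (0:Int) "" ++ "|<s>") = true ∧
                  PySem.List.pyGetD (d0.getD (PySem.List.pyGetD t (0:Int) "" ++ "|<s>") []) ((s : Nat) : Int) 0 = 0) := by
                rintro ⟨a, b⟩
                exact hc0 ⟨by rw [hcontA1, hcontD0]; exact a, by rw [hslotA1]; exact b⟩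
              have hs0 : ¬ ((q.2 ++ [(0:Int)]).getD s 0 = 0) := by
                intro h0
                apply hfire'
                refine ⟨?_, ?_, hk0d0, by rw [← hwq]; exact hRBq⟩
                · rw [← hwq, ← hcontD0]
                  exact (PySem.Dict.contains_iff_mem_keys dA q.1).mpr hqk
                · rw [← hwq, ← hslotA1, hgetA1, PySem.List.pyGetD_natCast]
                  exact h0
              have hmk0 : pvMarkN s (q.2 ++ [(0:Int)]) = q.2 ++ [(0:Int)] := by
                unfold pvMarkN
                exact if_neg hs0
              rw [if_pos (List.mem_cons.mpr (Or.inl (by rw [if_neg hc0]; exact hwq))), hmk0]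
            · rw [if_neg (show ¬ q.1 ∈ ((if (A1.contains (PySem.List.pyGetD t (0:Int) "" ++ "|<s>") = true ∧ PySem.List.pyGetD (A1.getD (PySem.List.pyGetD t (0:Int) "" ++ "|<s>") []) ((s : Nat) : Int) 0 = 0) then (PySem.List.pyGetD t (0:Int) "" ++ "|<s>") else (PySem.List.pyGetD t (0:Int) "" ++ "|" ++ PySem.List.pyGetD t (-1) "")) :: ((PySem.List.pyRange 1 (t.length : Int) 1).map (fun j => PySem.List.pyGetD t j "" ++ "|" ++ PySem.List.pyGetD t (j - 1) ""))) from by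
                intro hm
                rcases List.mem_cons.mp hm with h | h
                · rw [if_neg hc0] at h; exact hwq h
                · exact hRBq h)]
    · intro k i' hi'
      apply pv_slot_map dA _ (fun kk v => if kk ∈ ((if (A1.contains (PySem.List.pyGetD t (0:Int) "" ++ "|<s>") = true ∧ PySem.List.pyGetD (A1.getD (PySem.List.pyGetD t (0:Int) "" ++ "|<s>") []) ((s : Nat) : Int) 0 = 0) then (PySem.List.pyGetD t (0:Int) "" ++ "|<s>") else (PySem.List.pyGetD t (0:Int) "" ++ "|" ++ PySem.List.pyGetD t (-1) "")) :: ((PySem.List.pyRange 1 (t.length : Int) 1).map (fun j => PySem.List.pyGetD t j "" ++ "|" ++ PySem.List.pyGetD t (j - 1) ""))) then pvMarkN s (v ++ [(0:Int)]) else v ++ [(0:Int)]) hitemsA2 k i'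
      intro v
      have hpad1 : (v ++ [(0:Int)]).getD i' 0 = v.getD i' 0 := by
        rw [show ([(0:Int)] : List Int) = List.replicate 1 (0:Int) from rfl, pv_getD_pad]
      by_cases h1 : k ∈ ((if (A1.contains (PySem.List.pyGetD t (0:Int) "" ++ "|<s>") = true ∧ PySem.List.pyGetD (A1.getD (PySem.List.pyGetD t (0:Int) "" ++ "|<s>") []) ((s : Nat) : Int) 0 = 0) then (PySem.List.pyGetD t (0:Int) "" ++ "|<s>") else (PySem.List.pyGetD t (0:Int) "" ++ "|" ++ PySem.List.pyGetD t (-1) "")) :: ((PySem.List.pyRange 1 (t.length : Int) 1).map (fun j => PySem.List.pyGetD t j "" ++ "|" ++ PySem.List.pyGetD t (j - 1) "")))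
      · rw [if_pos h1, pv_getD_markN_ne s i' _ (by omega), hpad1]
      · rw [if_neg h1, hpad1]

-- ---------- the main induction over the documents ----------

lemma pvMain : ∀ (docs : List (List String)) (s : Nat) (d0 dA dB : PySem.Dict String (List Int)),
    dA.keys.Nodup →
    dA.keys = d0.keys →
    dB.items = dA.items.map (fun p => (p.1, p.2 ++ List.replicate docs.length (0:Int))) →
    (∀ p ∈ dA.items, s ≤ p.2.length) →
    (∀ k (i' : Nat), s ≤ i' → PySem.List.pyGetD (dA.getD k []) ((i' : Nat) : Int) 0 = PySem.List.pyGetD (d0.getD k []) ((i' : Nat) : Int) 0) →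
    (∀ p ∈ PySem.List.enumerate docs ((s : Nat) : Int), pvFire d0 p.1 p.2 = false) →
    ((PySem.List.enumerate docs ((s : Nat) : Int)).foldl (fun a p => pvAStep a p.1 p.2) dA).items
      = ((PySem.List.enumerate docs ((s : Nat) : Int)).foldl (fun a p => pvBStep a p.1 p.2) dB).items := by
  intro docs
  induction docs with
  | nil =>
    intro s d0 dA dB hnd hkeys hpad hlen hslot hfire
    rw [PySem.List.enumerate_nil]
    simp only [List.foldl_nil]
    symm
    simpa using hpad
  | cons t docs ih =>
    intro s d0 dA dB hnd hkeys hpad hlen hslot hfire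
    rw [PySem.List.enumerate_cons, List.foldl_cons, List.foldl_cons]
    obtain ⟨h1, h2, h3, h4⟩ := pv_doc_step s docs.length t d0 dA dB hnd hkeys (by simpa using hpad)
      hlen (fun k => hslot k s le_rfl)
      (hfire (((s : Nat) : Int), t) (by rw [PySem.List.enumerate_cons]; simp))
    have hnd' : (pvAStep dA ((s : Nat) : Int) t).keys.Nodup := by rw [h1]; exact hnd
    have hkeys' : (pvAStep dA ((s : Nat) : Int) t).keys = d0.keys := by rw [h1]; exact hkeys
    have hslot' : ∀ k (i' : Nat), s + 1 ≤ i' →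
        PySem.List.pyGetD ((pvAStep dA ((s : Nat) : Int) t).getD k []) ((i' : Nat) : Int) 0
          = PySem.List.pyGetD (d0.getD k []) ((i' : Nat) : Int) 0 := by
      intro k i' hi'
      rw [h4 k i' hi']
      exact hslot k i' (by omega)
    have hfire' : ∀ p ∈ PySem.List.enumerate docs (((s+1 : Nat) : Nat) : Int), pvFire d0 p.1 p.2 = false := by
      intro p hp
      apply hfire
      rw [PySem.List.enumerate_cons]
      right
      rw [show ((s : Nat) : Int) + 1 = (((s+1 : Nat) : Nat) : Int) by push_cast; ring]
      exact hp
    have h := ih (s+1) d0 _ _ hnd' hkeys' h3 h2 hslot' hfire'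
    rw [show (((s+1 : Nat) : Nat) : Int) = ((s : Nat) : Int) + 1 by push_cast; ring] at h
    exact h

-- ---------- unconditional step facts (used by the tightness proof) ----------

lemma pv_a1_items (dA : PySem.Dict String (List Int)) (hnd : dA.keys.Nodup) :
    (pvA1 dA).items = dA.items.map (fun p => (p.1, p.2 ++ [(0:Int)])) := by
  unfold pvA1
  rw [pv_append_fold dA.keys dA (fun k hk => (PySem.Dict.contains_iff_mem_keys dA k).mpr hk),
    pv_foldl_pvUpd_items _ dA.keys dA hnd (Or.inl hnd)]
  apply List.map_congr_left
  intro p hp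
  rw [if_pos (show p.1 ∈ dA.keys from List.mem_map_of_mem hp)]

lemma pv_a1_keys (dA : PySem.Dict String (List Int)) (hnd : dA.keys.Nodup) :
    (pvA1 dA).keys = dA.keys := by
  apply pv_keys_map' dA _ (fun p => (p.1, p.2 ++ [(0:Int)])) (pv_a1_items dA hnd)
  intro p; rfl

lemma pv_a1_slot (dA : PySem.Dict String (List Int)) (hnd : dA.keys.Nodup) (k : String) (i' : Nat) :
    PySem.List.pyGetD ((pvA1 dA).getD k []) ((i' : Nat) : Int) 0 = PySem.List.pyGetD (dA.getD k []) ((i' : Nat) : Int) 0 := by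
  apply pv_slot_map dA _ (fun _ v => v ++ [(0:Int)]) (pv_a1_items dA hnd) k i'
  intro v
  rw [show ([(0:Int)] : List Int) = List.replicate 1 (0:Int) from rfl, pv_getD_pad]

lemma pv_a_empty (s : Nat) (dA : PySem.Dict String (List Int)) :
    pvAStep dA ((s : Nat) : Int) [] = pvA1 dA := by
  unfold pvAStep pvA1
  rw [PySem.List.pyRange_one_eq_nil (by simp)]
  rfl

lemma pv_a_items2 (s : Nat) (t : List String) (dA : PySem.Dict String (List Int))
    (hnd : dA.keys.Nodup) (ht : t ≠ []) :
    (pvAStep dA ((s : Nat) : Int) t).items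
      = dA.items.map (fun q => (q.1, if q.1 ∈ pvL dA s t then pvMarkN s (q.2 ++ [(0:Int)]) else q.2 ++ [(0:Int)])) := by
  have hndA1 : (pvA1 dA).keys.Nodup := by rw [pv_a1_keys dA hnd]; exact hnd
  have hlen0 : 0 < (t.length : Int) := by
    have hne : t.length ≠ 0 := fun h => ht (List.eq_nil_of_length_eq_zero h)
    omega
  have hstepA : pvAStep dA ((s : Nat) : Int) t
      = (pvL dA s t).foldl (pvUpd (fun _ v => pvMarkN s v)) (pvA1 dA) := by
    unfold pvAStep
    show (PySem.List.pyRange 0 (t.length : Int) 1).foldl _ (pvA1 dA) = _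
    rw [PySem.List.pyRange_one_cons hlen0, List.foldl_cons,
      pv_a_head t s (pvA1 dA) hndA1 hlen0,
      pv_a_rest t s _ _
        (by rw [pv_keys_pvUpd _ (pvA1 dA) _ hndA1]; exact hndA1)
        (by intro j hj
            rw [PySem.List.mem_pyRange_one] at hj
            exact ⟨by omega, hj.2⟩),
      ← List.foldl_map, show ((0:Int) + 1) = (1:Int) by norm_num,
      show PySem.List.pyGetD t ((0:Int) - 1) "" = PySem.List.pyGetD t (-1) "" from rfl]
    rfl
  rw [hstepA, pv_foldl_pvUpd_items _ _ _ hndA1 (Or.inr (fun _ v => pv_markN_idem s v)),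
    pv_a1_items dA hnd, List.map_map]
  apply List.map_congr_left
  intro q hq
  simp only [Function.comp_apply]
  by_cases h1 : q.1 ∈ pvL dA s t
  · rw [if_pos h1, if_pos h1]
  · rw [if_neg h1, if_neg h1]

lemma pv_a_facts (s : Nat) (t : List String) (dA : PySem.Dict String (List Int))
    (hnd : dA.keys.Nodup) (hlen : ∀ p ∈ dA.items, s ≤ p.2.length) :
    (pvAStep dA ((s : Nat) : Int) t).keys = dA.keys ∧
    (∀ p ∈ (pvAStep dA ((s : Nat) : Int) t).items, s + 1 ≤ p.2.length) ∧
    (∀ k (i' : Nat), i' ≠ s →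
      PySem.List.pyGetD ((pvAStep dA ((s : Nat) : Int) t).getD k []) ((i' : Nat) : Int) 0
        = PySem.List.pyGetD (dA.getD k []) ((i' : Nat) : Int) 0) := by
  by_cases ht : t = []
  · subst ht
    rw [pv_a_empty s dA]
    refine ⟨pv_a1_keys dA hnd, ?_, fun k i' _ => pv_a1_slot dA hnd k i'⟩
    rw [pv_a1_items dA hnd]
    intro p hp
    obtain ⟨q, hq, rfl⟩ := List.mem_map.mp hp
    have := hlen q hq
    simp
    omega
  · refine ⟨?_, ?_, ?_⟩
    · apply pv_keys_map' dA _ _ (pv_a_items2 s t dA hnd ht)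
      intro q; rfl
    · intro p hp
      rw [pv_a_items2 s t dA hnd ht] at hp
      obtain ⟨q, hq, rfl⟩ := List.mem_map.mp hp
      have hq1 := hlen q hq
      by_cases h1 : q.1 ∈ pvL dA s t
      · rw [if_pos h1, pv_length_markN]
        simp
        omega
      · rw [if_neg h1]
        simp
        omega
    · intro k i' hi'
      apply pv_slot_map dA _ (fun kk v => if kk ∈ pvL dA s t then pvMarkN s (v ++ [(0:Int)]) else v ++ [(0:Int)])
        (pv_a_items2 s t dA hnd ht) k i'
      intro v
      have hpad1 : (v ++ [(0:Int)]).getD i' 0 = v.getD i' 0 := by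
        rw [show ([(0:Int)] : List Int) = List.replicate 1 (0:Int) from rfl, pv_getD_pad]
      by_cases h1 : k ∈ pvL dA s t
      · rw [if_pos h1, pv_getD_markN_ne s i' _ hi', hpad1]
      · rw [if_neg h1, hpad1]

lemma pv_b_items (s : Nat) (t : List String) (dB : PySem.Dict String (List Int))
    (hndB : dB.keys.Nodup) :
    (pvBStep dB ((s : Nat) : Int) t).items
      = dB.items.map (fun q => (q.1, if q.1 ∈ dB.keys then pvFB (pvCand t) s q.1 q.2 else q.2)) := by
  have h1 : pvBStep dB ((s : Nat) : Int) t
      = dB.keys.foldl (fun o k =>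
          if PySem.Set.contains (pvCand t) k = true ∧ PySem.List.pyGetD (o.getD k []) ((s : Nat) : Int) 0 = 0 then
            o.modify k [] (fun v => PySem.List.pySetD v ((s : Nat) : Int) 1)
          else o) dB := rfl
  rw [h1, pv_b_fold (pvCand t) s dB.keys dB hndB (fun k hk => (PySem.Dict.contains_iff_mem_keys dB k).mpr hk),
    pv_foldl_pvUpd_items _ _ _ hndB (Or.inl hndB)]
  apply List.map_congr_left
  intro q hq
  by_cases h1 : q.1 ∈ dB.keys
  · rw [if_pos h1, if_pos h1]
  · rw [if_neg h1, if_neg h1]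

lemma pv_b_facts (s : Nat) (t : List String) (dB : PySem.Dict String (List Int))
    (hndB : dB.keys.Nodup) :
    (pvBStep dB ((s : Nat) : Int) t).keys = dB.keys ∧
    (∀ k (i' : Nat), i' ≠ s →
      PySem.List.pyGetD ((pvBStep dB ((s : Nat) : Int) t).getD k []) ((i' : Nat) : Int) 0
        = PySem.List.pyGetD (dB.getD k []) ((i' : Nat) : Int) 0) := by
  refine ⟨?_, ?_⟩
  · apply pv_keys_map' dB _ _ (pv_b_items s t dB hndB)
    intro q; rfl
  · intro k i' hi'
    apply pv_slot_map dB _ (fun kk v => if kk ∈ dB.keys then pvFB (pvCand t) s kk v else v)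
      (pv_b_items s t dB hndB) k i'
    intro v
    by_cases h1 : k ∈ dB.keys
    · rw [if_pos h1]
      unfold pvFB
      split
      · exact pv_getD_markN_ne s i' v hi'
      · rfl
    · rw [if_neg h1]

-- ---------- positions below the current document index never change again ----------

lemma pv_a_fold_pres : ∀ (docs : List (List String)) (s : Nat) (dA : PySem.Dict String (List Int)),
    dA.keys.Nodup → (∀ p ∈ dA.items, s ≤ p.2.length) → ∀ (k : String) (pos : Nat), pos < s →
    PySem.List.pyGetD (((PySem.List.enumerate docs ((s : Nat) : Int)).foldl (fun a p => pvAStep a p.1 p.2) dA).getD k []) ((pos : Nat) : Int) 0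
      = PySem.List.pyGetD (dA.getD k []) ((pos : Nat) : Int) 0 := by
  intro docs
  induction docs with
  | nil =>
    intro s dA _ _ k pos _
    rw [PySem.List.enumerate_nil]
    rfl
  | cons t docs ih =>
    intro s dA hnd hlen k pos hpos
    rw [PySem.List.enumerate_cons, List.foldl_cons]
    obtain ⟨hk, hl, hs⟩ := pv_a_facts s t dA hnd hlen
    have hnd' : (pvAStep dA ((s : Nat) : Int) t).keys.Nodup := by rw [hk]; exact hnd
    have h := ih (s+1) _ hnd' hl k pos (by omega)
    rw [show (((s+1 : Nat) : Nat) : Int) = ((s : Nat) : Int) + 1 by push_cast; ring] at h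
    rw [h, hs k pos (by omega)]

lemma pv_b_fold_pres : ∀ (docs : List (List String)) (s : Nat) (dB : PySem.Dict String (List Int)),
    dB.keys.Nodup → ∀ (k : String) (pos : Nat), pos < s →
    PySem.List.pyGetD (((PySem.List.enumerate docs ((s : Nat) : Int)).foldl (fun a p => pvBStep a p.1 p.2) dB).getD k []) ((pos : Nat) : Int) 0
      = PySem.List.pyGetD (dB.getD k []) ((pos : Nat) : Int) 0 := by
  intro docs
  induction docs with
  | nil =>
    intro s dB _ k pos _
    rw [PySem.List.enumerate_nil]
    rfl
  | cons t docs ih =>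
    intro s dB hndB k pos hpos
    rw [PySem.List.enumerate_cons, List.foldl_cons]
    obtain ⟨hk, hs⟩ := pv_b_facts s t dB hndB
    have hnd' : (pvBStep dB ((s : Nat) : Int) t).keys.Nodup := by rw [hk]; exact hndB
    have h := ih (s+1) _ hnd' k pos (by omega)
    rw [show (((s+1 : Nat) : Nat) : Int) = ((s : Nat) : Int) + 1 by push_cast; ring] at h
    rw [h, hs k pos (by omega)]

-- ---------- at a firing document the two steps produce different slots at the wraparound key ----------

lemma pv_fire_step (s : Nat) (t : List String) (d0 dA dB : PySem.Dict String (List Int))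
    (hnd : dA.keys.Nodup) (hkeys : dA.keys = d0.keys)
    (hlen : ∀ p ∈ dA.items, s ≤ p.2.length)
    (hslotA : ∀ k, PySem.List.pyGetD (dA.getD k []) ((s : Nat) : Int) 0 = PySem.List.pyGetD (d0.getD k []) ((s : Nat) : Int) 0)
    (hndB : dB.keys.Nodup) (hkeysB : dB.keys = d0.keys)
    (hslotB : ∀ k, PySem.List.pyGetD (dB.getD k []) ((s : Nat) : Int) 0 = PySem.List.pyGetD (d0.getD k []) ((s : Nat) : Int) 0)
    (hf : pvFire d0 ((s : Nat) : Int) t = true) :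
    PySem.List.pyGetD ((pvAStep dA ((s : Nat) : Int) t).getD (PySem.List.pyGetD t (0:Int) "" ++ "|" ++ PySem.List.pyGetD t (-1) "") []) ((s : Nat) : Int) 0 = 1 ∧
    PySem.List.pyGetD ((pvBStep dB ((s : Nat) : Int) t).getD (PySem.List.pyGetD t (0:Int) "" ++ "|" ++ PySem.List.pyGetD t (-1) "") []) ((s : Nat) : Int) 0 = 0 := by
  unfold pvFire at hf
  simp only [Bool.and_eq_true, decide_eq_true_eq, Bool.not_eq_true'] at hf
  obtain ⟨⟨⟨hte, hopw⟩, hopk⟩, hnin⟩ := hf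
  have ht : t ≠ [] := by
    intro h
    rw [h] at hte
    simp at hte
  rw [pv_headI t ht, pv_lastD t ht] at hopw hnin
  rw [pv_headI t ht] at hopk
  have hwn : (PySem.List.pyGetD t (0:Int) "" ++ "|" ++ PySem.List.pyGetD t (-1) "") ∉ ((PySem.List.pyRange 1 (t.length : Int) 1).map (fun j => PySem.List.pyGetD t j "" ++ "|" ++ PySem.List.pyGetD t (j - 1) "")) := fun hm => hnin ((pv_bigrams_mem t _).mpr hm)
  unfold pvOpen at hopw hopk
  simp only [Bool.and_eq_true, decide_eq_true_eq, Int.toNat_natCast] at hopw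
  obtain ⟨hcw0, hsw0⟩ := hopw
  have hk0d0 : ¬(d0.contains (PySem.List.pyGetD t (0:Int) "" ++ "|<s>") = true ∧ ((d0.getD (PySem.List.pyGetD t (0:Int) "" ++ "|<s>") []) : List Int).getD s 0 = 0) := by
    rintro ⟨a, b⟩
    rw [a, Bool.true_and, decide_eq_false_iff_not] at hopk
    apply hopk
    rw [Int.toNat_natCast]
    exact b
  -- translate to dA / pvA1
  have hcontD0 : ∀ k, dA.contains k = d0.contains k :=
    fun k => pv_contains_congr_keys d0 dA hkeys k
  have hcwA : dA.contains (PySem.List.pyGetD t (0:Int) "" ++ "|" ++ PySem.List.pyGetD t (-1) "") = true := by rw [hcontD0]; exact hcw0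
  have hk0nA1 : ¬((pvA1 dA).contains (PySem.List.pyGetD t (0:Int) "" ++ "|<s>") = true ∧
      PySem.List.pyGetD ((pvA1 dA).getD (PySem.List.pyGetD t (0:Int) "" ++ "|<s>") []) ((s : Nat) : Int) 0 = 0) := by
    rintro ⟨a, b⟩
    apply hk0d0
    constructor
    · rw [← hcontD0, ← pv_contains_congr_keys dA (pvA1 dA) (pv_a1_keys dA hnd)]
      exact a
    · rw [pv_a1_slot dA hnd, hslotA, PySem.List.pyGetD_natCast] at b
      exact b
  have hWmem : (PySem.List.pyGetD t (0:Int) "" ++ "|" ++ PySem.List.pyGetD t (-1) "") ∈ pvL dA s t := by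
    unfold pvL pvHeadKey
    rw [if_neg hk0nA1]
    exact List.mem_cons_self ..
  -- the A side marks W at position s
  have hAside : PySem.List.pyGetD ((pvAStep dA ((s : Nat) : Int) t).getD (PySem.List.pyGetD t (0:Int) "" ++ "|" ++ PySem.List.pyGetD t (-1) "") []) ((s : Nat) : Int) 0 = 1 := by
    have hsome : (dA.get? (PySem.List.pyGetD t (0:Int) "" ++ "|" ++ PySem.List.pyGetD t (-1) "")).isSome = true := by
      rw [← PySem.Dict.contains_eq_isSome_get?]
      exact hcwA
    obtain ⟨row, hrow⟩ := Option.isSome_iff_exists.mp hsome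
    have hmemrow : ((PySem.List.pyGetD t (0:Int) "" ++ "|" ++ PySem.List.pyGetD t (-1) ""), row) ∈ dA.items := PySem.Dict.mem_items_of_get?_eq_some dA hrow
    have hlenrow : s ≤ row.length := hlen _ hmemrow
    have hget : (pvAStep dA ((s : Nat) : Int) t).get? (PySem.List.pyGetD t (0:Int) "" ++ "|" ++ PySem.List.pyGetD t (-1) "")
        = some (if (PySem.List.pyGetD t (0:Int) "" ++ "|" ++ PySem.List.pyGetD t (-1) "") ∈ pvL dA s t then pvMarkN s (row ++ [(0:Int)]) else row ++ [(0:Int)]) := by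
      rw [pv_get?_map dA _ (fun kk v => if kk ∈ pvL dA s t then pvMarkN s (v ++ [(0:Int)]) else v ++ [(0:Int)])
        (pv_a_items2 s t dA hnd ht), hrow]
      rfl
    have hrow0 : (row ++ [(0:Int)]).getD s 0 = 0 := by
      rw [show ([(0:Int)] : List Int) = List.replicate 1 (0:Int) from rfl, pv_getD_pad]
      have hx := hslotA (PySem.List.pyGetD t (0:Int) "" ++ "|" ++ PySem.List.pyGetD t (-1) "")
      rw [PySem.Dict.getD_eq_get?_getD, hrow, Option.getD_some, PySem.List.pyGetD_natCast,
        PySem.List.pyGetD_natCast] at hx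
      rw [hx]
      exact hsw0
    rw [PySem.Dict.getD_eq_get?_getD, hget, Option.getD_some, if_pos hWmem, PySem.List.pyGetD_natCast]
    unfold pvMarkN
    rw [if_pos hrow0, pv_getD_set_self, if_pos (by simp; omega)]
  -- the B side leaves W's slot at 0
  have hBside : PySem.List.pyGetD ((pvBStep dB ((s : Nat) : Int) t).getD (PySem.List.pyGetD t (0:Int) "" ++ "|" ++ PySem.List.pyGetD t (-1) "") []) ((s : Nat) : Int) 0 = 0 := by
    have hWK0 : (PySem.List.pyGetD t (0:Int) "" ++ "|" ++ PySem.List.pyGetD t (-1) "") ≠ (PySem.List.pyGetD t (0:Int) "" ++ "|<s>") := by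
      intro h
      apply hk0d0
      rw [← h]
      exact ⟨hcw0, hsw0⟩
    have hnc : ¬ (PySem.Set.contains (pvCand t) (PySem.List.pyGetD t (0:Int) "" ++ "|" ++ PySem.List.pyGetD t (-1) "") = true) := by
      intro hc
      have hmem := (PySem.Set.contains_iff _ _).mp hc
      unfold pvCand at hmem
      rw [if_neg ht] at hmem
      rcases (PySem.Set.mem_add _ _ _).mp hmem with h | h
      · exact hwn ((PySem.Set.mem_ofList _ _).mp h)
      · exact hWK0 h
    rcases hv : dB.get? (PySem.List.pyGetD t (0:Int) "" ++ "|" ++ PySem.List.pyGetD t (-1) "") with _ | rowB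
    · have hget : (pvBStep dB ((s : Nat) : Int) t).get? (PySem.List.pyGetD t (0:Int) "" ++ "|" ++ PySem.List.pyGetD t (-1) "") = none := by
        rw [pv_get?_map dB _ (fun kk v => if kk ∈ dB.keys then pvFB (pvCand t) s kk v else v)
          (pv_b_items s t dB hndB), hv]
        rfl
      rw [PySem.Dict.getD_eq_get?_getD, hget]
      rfl
    · have hget : (pvBStep dB ((s : Nat) : Int) t).get? (PySem.List.pyGetD t (0:Int) "" ++ "|" ++ PySem.List.pyGetD t (-1) "")
          = some (if (PySem.List.pyGetD t (0:Int) "" ++ "|" ++ PySem.List.pyGetD t (-1) "") ∈ dB.keys then pvFB (pvCand t) s (PySem.List.pyGetD t (0:Int) "" ++ "|" ++ PySem.List.pyGetD t (-1) "") rowB else rowB) := by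
        rw [pv_get?_map dB _ (fun kk v => if kk ∈ dB.keys then pvFB (pvCand t) s kk v else v)
          (pv_b_items s t dB hndB), hv]
        rfl
      have hrB : (if (PySem.List.pyGetD t (0:Int) "" ++ "|" ++ PySem.List.pyGetD t (-1) "") ∈ dB.keys then pvFB (pvCand t) s (PySem.List.pyGetD t (0:Int) "" ++ "|" ++ PySem.List.pyGetD t (-1) "") rowB else rowB) = rowB := by
        by_cases h1 : (PySem.List.pyGetD t (0:Int) "" ++ "|" ++ PySem.List.pyGetD t (-1) "") ∈ dB.keys
        · rw [if_pos h1]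
          unfold pvFB
          rw [if_neg hnc]
        · rw [if_neg h1]
      have hx := hslotB (PySem.List.pyGetD t (0:Int) "" ++ "|" ++ PySem.List.pyGetD t (-1) "")
      rw [PySem.Dict.getD_eq_get?_getD, hv, Option.getD_some] at hx
      rw [PySem.Dict.getD_eq_get?_getD, hget, Option.getD_some, hrB, hx, PySem.List.pyGetD_natCast]
      exact hsw0
  exact ⟨hAside, hBside⟩

-- ---------- the main tightness induction ----------

lemma pvTightMain : ∀ (docs : List (List String)) (s : Nat) (d0 dA dB : PySem.Dict String (List Int)),
    dA.keys.Nodup → dA.keys = d0.keys →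
    (∀ p ∈ dA.items, s ≤ p.2.length) →
    (∀ k (i' : Nat), s ≤ i' → PySem.List.pyGetD (dA.getD k []) ((i' : Nat) : Int) 0 = PySem.List.pyGetD (d0.getD k []) ((i' : Nat) : Int) 0) →
    dB.keys.Nodup → dB.keys = d0.keys →
    (∀ k (i' : Nat), s ≤ i' → PySem.List.pyGetD (dB.getD k []) ((i' : Nat) : Int) 0 = PySem.List.pyGetD (d0.getD k []) ((i' : Nat) : Int) 0) →
    (∃ p ∈ PySem.List.enumerate docs ((s : Nat) : Int), pvFire d0 p.1 p.2 = true) →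
    ∃ (i : Nat) (w : String),
      PySem.List.pyGetD (((PySem.List.enumerate docs ((s : Nat) : Int)).foldl (fun a p => pvAStep a p.1 p.2) dA).getD w []) ((i : Nat) : Int) 0 = 1 ∧
      PySem.List.pyGetD (((PySem.List.enumerate docs ((s : Nat) : Int)).foldl (fun a p => pvBStep a p.1 p.2) dB).getD w []) ((i : Nat) : Int) 0 = 0 := by
  intro docs
  induction docs with
  | nil =>
    intro s d0 dA dB _ _ _ _ _ _ _ hex
    rw [PySem.List.enumerate_nil] at hex
    obtain ⟨p, hp, -⟩ := hex
    exact absurd hp (List.not_mem_nil)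
  | cons t docs ih =>
    intro s d0 dA dB hnd hkeys hlen hslotA hndB hkeysB hslotB hex
    rw [PySem.List.enumerate_cons, List.foldl_cons, List.foldl_cons]
    obtain ⟨hkA, hlA, hsA⟩ := pv_a_facts s t dA hnd hlen
    obtain ⟨hkB, hsB⟩ := pv_b_facts s t dB hndB
    have hndA' : (pvAStep dA ((s : Nat) : Int) t).keys.Nodup := by rw [hkA]; exact hnd
    have hndB' : (pvBStep dB ((s : Nat) : Int) t).keys.Nodup := by rw [hkB]; exact hndB
    have hcast : (((s+1 : Nat) : Nat) : Int) = ((s : Nat) : Int) + 1 := by push_cast; ring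
    by_cases hf : pvFire d0 ((s : Nat) : Int) t = true
    · obtain ⟨h1, h0⟩ := pv_fire_step s t d0 dA dB hnd hkeys hlen (fun k => hslotA k s le_rfl)
        hndB hkeysB (fun k => hslotB k s le_rfl) hf
      refine ⟨s, (PySem.List.pyGetD t (0:Int) "" ++ "|" ++ PySem.List.pyGetD t (-1) ""), ?_, ?_⟩
      · have hpres := pv_a_fold_pres docs (s+1) _ hndA' hlA (PySem.List.pyGetD t (0:Int) "" ++ "|" ++ PySem.List.pyGetD t (-1) "") s (by omega)
        rw [hcast] at hpres
        rw [hpres]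
        exact h1
      · have hpres := pv_b_fold_pres docs (s+1) _ hndB' (PySem.List.pyGetD t (0:Int) "" ++ "|" ++ PySem.List.pyGetD t (-1) "") s (by omega)
        rw [hcast] at hpres
        rw [hpres]
        exact h0
    · obtain ⟨p, hp, hpf⟩ := hex
      rw [PySem.List.enumerate_cons] at hp
      rcases List.mem_cons.mp hp with h | h
      · rw [h] at hpf
        exact absurd hpf hf
      · have hex' : ∃ p ∈ PySem.List.enumerate docs (((s+1 : Nat) : Nat) : Int), pvFire d0 p.1 p.2 = true := by
          rw [hcast]
          exact ⟨p, h, hpf⟩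
        have hkeysA' : (pvAStep dA ((s : Nat) : Int) t).keys = d0.keys := by rw [hkA]; exact hkeys
        have hkeysB' : (pvBStep dB ((s : Nat) : Int) t).keys = d0.keys := by rw [hkB]; exact hkeysB
        have hslotA' : ∀ k (i' : Nat), s + 1 ≤ i' →
            PySem.List.pyGetD ((pvAStep dA ((s : Nat) : Int) t).getD k []) ((i' : Nat) : Int) 0
              = PySem.List.pyGetD (d0.getD k []) ((i' : Nat) : Int) 0 := by
          intro k i' hi'
          rw [hsA k i' (by omega)]
          exact hslotA k i' (by omega)
        have hslotB' : ∀ k (i' : Nat), s + 1 ≤ i' →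
            PySem.List.pyGetD ((pvBStep dB ((s : Nat) : Int) t).getD k []) ((i' : Nat) : Int) 0
              = PySem.List.pyGetD (d0.getD k []) ((i' : Nat) : Int) 0 := by
          intro k i' hi'
          rw [hsB k i' (by omega)]
          exact hslotB k i' (by omega)
        have h := ih (s+1) d0 _ _ hndA' hkeysA' hlA hslotA' hndB' hkeysB' hslotB' hex'
        rw [hcast] at h
        exact h

-- ===== VERDICT (by name: the statement is the Claim_ definition above) =====
theorem sumFEBigram_spec : Claim_unchanged_sumFEBigram := by
  intro data atribut _
  intro hD
  show sumFEBigram data atribut = sumFEBigram_alt data atribut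
  have hA : sumFEBigram data atribut
      = ((PySem.List.enumerate data 0).foldl (fun a p => pvAStep a p.1 p.2) (PySem.Dict.ofList atribut)).items := by
    unfold sumFEBigram
    exact congrArg PySem.Dict.items (pv_bridge0 pvAStep [] data (PySem.Dict.ofList atribut))
  have hout0 : ((PySem.Dict.ofList atribut).items.foldl
      (fun o p => o.insert p.1 (p.2 ++ PySem.List.pyRepeat [(0:Int)] (data.length : Int)))
      PySem.Dict.empty).items
      = (PySem.Dict.ofList atribut).items.map
        (fun p => (p.1, p.2 ++ List.replicate data.length (0:Int))) := by
    rw [PySem.Dict.items_foldl_insert_fresh (PySem.Dict.ofList atribut).items Prod.fst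
      (fun p => p.2 ++ PySem.List.pyRepeat [(0:Int)] (data.length : Int)) PySem.Dict.empty
      (fun a _ => PySem.Dict.contains_empty _) (PySem.Dict.nodup_keys_ofList atribut)]
    simp [PySem.List.pyRepeat_singleton, PySem.Dict.empty]
  have hB : sumFEBigram_alt data atribut
      = ((PySem.List.enumerate data 0).foldl (fun a p => pvBStep a p.1 p.2)
          ((PySem.Dict.ofList atribut).items.foldl
            (fun o p => o.insert p.1 (p.2 ++ PySem.List.pyRepeat [(0:Int)] (data.length : Int)))
            PySem.Dict.empty)).items := rfl
  have hfire : ∀ p ∈ PySem.List.enumerate data ((0 : Nat) : Int), pvFire (PySem.Dict.ofList atribut) p.1 p.2 = false := by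
    intro p hp
    by_contra hcon
    exact hD (List.any_eq_true.mpr ⟨p, by simpa using hp, by simpa using hcon⟩)
  rw [hA, hB]
  exact pvMain data 0 (PySem.Dict.ofList atribut) _ _ (PySem.Dict.nodup_keys_ofList atribut) rfl
    (by rw [hout0]) (fun p _ => Nat.zero_le _) (fun k i' _ => rfl) hfire

theorem sumFEBigram_changed : Claim_changed_sumFEBigram := by unfold Claim_changed_sumFEBigram; decide

theorem sumFEBigram_tight : Claim_exact_sumFEBigram := by
  intro data atribut _ hD heq
  have hA : sumFEBigram data atribut
      = ((PySem.List.enumerate data 0).foldl (fun a p => pvAStep a p.1 p.2) (PySem.Dict.ofList atribut)).items := by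
    unfold sumFEBigram
    exact congrArg PySem.Dict.items (pv_bridge0 pvAStep [] data (PySem.Dict.ofList atribut))
  have hout0 : ((PySem.Dict.ofList atribut).items.foldl
      (fun o p => o.insert p.1 (p.2 ++ PySem.List.pyRepeat [(0:Int)] (data.length : Int)))
      PySem.Dict.empty).items
      = (PySem.Dict.ofList atribut).items.map
        (fun p => (p.1, p.2 ++ List.replicate data.length (0:Int))) := by
    rw [PySem.Dict.items_foldl_insert_fresh (PySem.Dict.ofList atribut).items Prod.fst
      (fun p => p.2 ++ PySem.List.pyRepeat [(0:Int)] (data.length : Int)) PySem.Dict.empty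
      (fun a _ => PySem.Dict.contains_empty _) (PySem.Dict.nodup_keys_ofList atribut)]
    simp [PySem.List.pyRepeat_singleton, PySem.Dict.empty]
  have hB : sumFEBigram_alt data atribut
      = ((PySem.List.enumerate data 0).foldl (fun a p => pvBStep a p.1 p.2)
          ((PySem.Dict.ofList atribut).items.foldl
            (fun o p => o.insert p.1 (p.2 ++ PySem.List.pyRepeat [(0:Int)] (data.length : Int)))
            PySem.Dict.empty)).items := rfl
  set d0 := PySem.Dict.ofList atribut with hd0
  set dB0 := (PySem.Dict.ofList atribut).items.foldl
      (fun o p => o.insert p.1 (p.2 ++ PySem.List.pyRepeat [(0:Int)] (data.length : Int)))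
      PySem.Dict.empty with hdB0
  have hkeysB : dB0.keys = d0.keys := by
    apply pv_keys_map' d0 dB0 (fun p => (p.1, p.2 ++ List.replicate data.length (0:Int))) hout0
    intro p; rfl
  have hndB : dB0.keys.Nodup := by rw [hkeysB]; exact PySem.Dict.nodup_keys_ofList atribut
  have hslotB : ∀ k (i' : Nat), PySem.List.pyGetD (dB0.getD k []) ((i' : Nat) : Int) 0
      = PySem.List.pyGetD (d0.getD k []) ((i' : Nat) : Int) 0 := by
    intro k i'
    apply pv_slot_map d0 dB0 (fun _ v => v ++ List.replicate data.length (0:Int)) hout0 k i'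
    intro v
    exact pv_getD_pad v data.length i'
  have hex : ∃ p ∈ PySem.List.enumerate data (((0 : Nat) : Nat) : Int), pvFire d0 p.1 p.2 = true := by
    obtain ⟨p, hp, hpf⟩ := List.any_eq_true.mp hD
    exact ⟨p, by simpa using hp, by simpa using hpf⟩
  obtain ⟨i, w, h1, h0⟩ := pvTightMain data 0 d0 d0 dB0 (PySem.Dict.nodup_keys_ofList atribut) rfl
    (fun p _ => Nat.zero_le _) (fun k i' _ => rfl) hndB hkeysB (fun k i' _ => hslotB k i') hex
  have hdicts : (PySem.List.enumerate data 0).foldl (fun a p => pvAStep a p.1 p.2) d0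
      = (PySem.List.enumerate data 0).foldl (fun a p => pvBStep a p.1 p.2) dB0 := by
    apply PySem.Dict.ext
    rw [← hA, ← hB]
    exact heq
  rw [show (((0 : Nat) : Nat) : Int) = (0 : Int) from rfl] at h1 h0
  rw [hdicts] at h1
  rw [h0] at h1
  exact absurd h1 (by norm_num)
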